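-- pv_equiv track=rewrite | github.com/Tulpana/ARC-AGI-2 | arc_agi_2_submission/predict_competition.py | _recolor_components_to_palette
-- ===== SOURCE A (Python) =====
-- from collections import Counter, deque
--
-- def _is_rectangular_grid(grid) -> bool:
--     if not isinstance(grid, list) or not grid:
--         return False
--     first = grid[0]
--     if not isinstance(first, list):
--         return False
--     width = len(first)
--     if width == 0:
--         return False
--     for row in grid:
--         if not isinstance(row, list) or len(row) != width:
--             return False
--     return True
--
-- def _copy_grid(grid):
--     if not _is_rectangular_grid(grid):
--         return grid
--     return [list(row) for row in grid]
--
-- def _mode_color(grid):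
--     freq: Counter[int] = Counter()
--     for row in grid or []:
--         for cell in row:
--             try:
--                 freq.update([int(cell)])
--             except Exception:
--                 continue
--     return freq.most_common(1)[0][0] if freq else 0
--
-- def _connected_components(grid, bg=None):
--     if not _is_rectangular_grid(grid):
--         return []
--     height, width = len(grid), len(grid[0])
--     seen = [[False] * width for _ in range(height)]
--     components = []
--     for r in range(height):
--         for c in range(width):
--             if seen[r][c]:
--                 continue
--             value = grid[r][c]
--             if bg is not None and value == bg:
--                 seen[r][c] = True
--                 continue
--             if bg is None and value == 0:
--                 seen[r][c] = True
--                 continue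
--             queue = deque([(r, c)])
--             seen[r][c] = True
--             comp = []
--             while queue:
--                 rr, cc = queue.popleft()
--                 comp.append((rr, cc))
--                 for dr, dc in ((1, 0), (-1, 0), (0, 1), (0, -1)):
--                     nr, nc = rr + dr, cc + dc
--                     if 0 <= nr < height and 0 <= nc < width and not seen[nr][nc]:
--                         if bg is None and grid[nr][nc] != 0:
--                             seen[nr][nc] = True
--                             queue.append((nr, nc))
--                         elif bg is not None and grid[nr][nc] != bg:
--                             seen[nr][nc] = True
--                             queue.append((nr, nc))
--                         else:
--                             seen[nr][nc] = True
--             if comp: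
--                 components.append(comp)
--     return components
--
-- def _recolor_components_to_palette(grid, palette_freq):
--     if not _is_rectangular_grid(grid) or not palette_freq:
--         return grid
--     allowed = set(palette_freq.keys())
--     ranked = sorted(palette_freq.items(), key=lambda kv: (-kv[1], kv[0]))
--     recolored = _copy_grid(grid)
--     comps = _connected_components(grid, bg=_mode_color(grid))
--     for comp in comps:
--         r0, c0 = comp[0]
--         color = grid[r0][c0]
--         if color in allowed:
--             continue
--         size = len(comp)
--         best_color = ranked[0][0]
--         best_diff = abs(size - ranked[0][1])
--         for cand, freq in ranked[1:]:
--             diff = abs(size - freq)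
--             if diff < best_diff:
--                 best_diff = diff
--                 best_color = cand
--         for r, c in comp:
--             recolored[r][c] = best_color
--     return recolored
-- ===== SOURCE B (Python) =====
-- from collections import Counter
--
-- def _is_rectangular_grid(grid) -> bool:
--     if not isinstance(grid, list) or not grid:
--         return False
--     first = grid[0]
--     if not isinstance(first, list):
--         return False
--     width = len(first)
--     if width == 0:
--         return False
--     for row in grid:
--         if not isinstance(row, list) or len(row) != width:
--             return False
--     return True
--
-- def _mode_color(grid):
--     freq = Counter()
--     for row in grid or []:
--         for cell in row:
--             try:
--                 freq.update([int(cell)])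
--             except Exception:
--                 continue
--     return freq.most_common(1)[0][0] if freq else 0
--
-- def _recolor_components_to_palette(grid, palette_freq):
--     # Connected components via iterative min-label propagation instead of BFS.
--     if not _is_rectangular_grid(grid) or not palette_freq:
--         return grid
--     allowed = set(palette_freq.keys())
--     ranked = sorted(palette_freq.items(), key=lambda kv: (-kv[1], kv[0]))
--     bg = _mode_color(grid)
--     H, W = len(grid), len(grid[0])
--     n = H * W
--     # label[i] = flat id label; -1 marks background cells
--     label = [(-1 if grid[i // W][i % W] == bg else i) for i in range(n)]
--     for _ in range(n * n):
--         new = list(label)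
--         for i in range(n):
--             if label[i] < 0:
--                 continue
--             m = label[i]
--             r, c = i // W, i % W
--             if r > 0 and label[i - W] >= 0 and label[i - W] < m:
--                 m = label[i - W]
--             if r + 1 < H and label[i + W] >= 0 and label[i + W] < m:
--                 m = label[i + W]
--             if c > 0 and label[i - 1] >= 0 and label[i - 1] < m:
--                 m = label[i - 1]
--             if c + 1 < W and label[i + 1] >= 0 and label[i + 1] < m:
--                 m = label[i + 1]
--             new[i] = m
--         if new == label:
--             break
--         label = new
--     # component sizes, keyed by root label
--     size = {}
--     for i in range(n):
--         if label[i] >= 0: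
--             size[label[i]] = size.get(label[i], 0) + 1
--     # new color per root: palette color with frequency closest to the size
--     best = {}
--     for root, sz in size.items():
--         b, bd = ranked[0][0], abs(sz - ranked[0][1])
--         for cand, f in ranked[1:]:
--             d = abs(sz - f)
--             if d < bd:
--                 bd, b = d, cand
--         best[root] = b
--     out = []
--     for r in range(H):
--         row = []
--         for c in range(W):
--             l = label[r * W + c]
--             if l >= 0 and grid[l // W][l % W] not in allowed:
--                 row.append(best[l])
--             else:
--                 row.append(grid[r][c])
--         out.append(row)
--     return out
-- ===== Notes on version B (the rewrite author's own statement) =====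
-- stated objective: alternative
-- what changed: The BFS flood-fill over an explicit queue and seen-matrix is replaced by iterative minimum-label propagation over flat cell ids (connected-component labelling): each non-background cell starts labelled with its own id, labels repeatedly take the minimum of their 4-neighbours until a fixpoint, so each component is keyed by its row-major-first cell, and the output grid is then built cell by cell from the label array instead of mutating a copy component by component.
import Mathlib
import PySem

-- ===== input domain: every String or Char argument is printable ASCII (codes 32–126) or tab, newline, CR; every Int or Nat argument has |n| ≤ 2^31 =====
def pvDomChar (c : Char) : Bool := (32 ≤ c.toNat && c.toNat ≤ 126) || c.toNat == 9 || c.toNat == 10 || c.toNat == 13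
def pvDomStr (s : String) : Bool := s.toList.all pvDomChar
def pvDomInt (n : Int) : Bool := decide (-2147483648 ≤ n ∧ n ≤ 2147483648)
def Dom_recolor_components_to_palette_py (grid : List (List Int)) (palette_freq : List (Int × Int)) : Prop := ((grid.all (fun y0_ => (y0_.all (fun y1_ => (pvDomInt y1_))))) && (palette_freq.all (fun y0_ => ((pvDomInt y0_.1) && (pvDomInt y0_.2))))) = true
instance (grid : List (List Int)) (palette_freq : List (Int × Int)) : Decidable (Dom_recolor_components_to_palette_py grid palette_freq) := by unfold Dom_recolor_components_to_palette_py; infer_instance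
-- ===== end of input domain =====

-- ===== PORT A =====
-- shared module helpers (A's and B's Python share _is_rectangular_grid/_mode_color and the best-color scan)
def pvGet2 (grid : List (List Int)) (r c : Nat) : Int := (grid.getD r []).getD c 0

def pvIsRect : List (List Int) → Bool
  | [] => false
  | first :: rest =>
    if first.length == 0 then false
    else (first :: rest).all (fun row => row.length == first.length)

def pvModeColor (grid : List (List Int)) : Int :=
  let freq := grid.foldl
    (fun d row => row.foldl (fun (d : PySem.Dict Int Int) cell => d.modify cell 0 (· + 1)) d)
    PySem.Dict.empty
  -- most_common(1)[0][0] if freq else 0 : stable sort of items by count, descending, take head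
  match PySem.List.sorted freq.items (fun kv => kv.2) true with
  | [] => 0
  | kv :: _ => kv.1

def pvBestColor (ranked : List (Int × Int)) (size : Int) : Int :=
  match ranked with
  | [] => 0  -- unreachable: called only with a nonempty palette
  | (c0, f0) :: rest =>
    (rest.foldl (fun best kv =>
      let diff := |size - kv.2|
      if diff < best.2 then (kv.1, diff) else best) (c0, |size - f0|)).1

def pvSeen (seen : List (List Bool)) (r c : Nat) : Bool := (seen.getD r []).getD c false
def pvMark (seen : List (List Bool)) (r c : Nat) : List (List Bool) :=
  seen.set r ((seen.getD r []).set c true)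

def pvBfsStep (grid : List (List Int)) (H W : Nat) (bg : Option Int) (rr cc : Nat)
    (st : List (Nat × Nat) × List (List Bool)) (d : Int × Int) :
    List (Nat × Nat) × List (List Bool) :=
  let nr : Int := (rr : Int) + d.1
  let nc : Int := (cc : Int) + d.2
  if 0 ≤ nr ∧ nr < (H : Int) ∧ 0 ≤ nc ∧ nc < (W : Int) ∧ pvSeen st.2 nr.toNat nc.toNat = false then
    match bg with
    | none =>
      if pvGet2 grid nr.toNat nc.toNat ≠ 0 then
        (st.1 ++ [(nr.toNat, nc.toNat)], pvMark st.2 nr.toNat nc.toNat)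
      else (st.1, pvMark st.2 nr.toNat nc.toNat)
    | some b =>
      if pvGet2 grid nr.toNat nc.toNat ≠ b then
        (st.1 ++ [(nr.toNat, nc.toNat)], pvMark st.2 nr.toNat nc.toNat)
      else (st.1, pvMark st.2 nr.toNat nc.toNat)
  else st

def pvBfs (grid : List (List Int)) (H W : Nat) (bg : Option Int) :
    Nat → List (Nat × Nat) → List (List Bool) → List (Nat × Nat) →
    List (Nat × Nat) × List (List Bool)
  | 0, _, seen, comp => (comp, seen)  -- fuel guard only; never reached with the fuel supplied
  | fuel + 1, queue, seen, comp =>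
    match queue with
    | [] => (comp, seen)
    | (rr, cc) :: rest =>
      let comp' := comp ++ [(rr, cc)]
      let st := [((1 : Int), (0 : Int)), (-1, 0), (0, 1), (0, -1)].foldl
        (pvBfsStep grid H W bg rr cc) (rest, seen)
      pvBfs grid H W bg fuel st.1 st.2 comp'

def pvScanCell (grid : List (List Int)) (H W : Nat) (bg : Option Int)
    (st : List (List Bool) × List (List (Nat × Nat))) (r c : Nat) :
    List (List Bool) × List (List (Nat × Nat)) :=
  if pvSeen st.1 r c then st
  else
    let value := pvGet2 grid r c
    if (match bg with | some b => value == b | none => false) then (pvMark st.1 r c, st.2)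
    else if (match bg with | none => value == 0 | some _ => false) then (pvMark st.1 r c, st.2)
    else
      let res := pvBfs grid H W bg (H * W + 1) [(r, c)] (pvMark st.1 r c) []
      if res.1 ≠ [] then (res.2, st.2 ++ [res.1]) else (res.2, st.2)

def pvConnComponents (grid : List (List Int)) (bg : Option Int) : List (List (Nat × Nat)) :=
  if pvIsRect grid = false then []
  else
    let H := grid.length
    let W := (grid.getD 0 []).length
    ((List.range H).foldl
      (fun st r => (List.range W).foldl (fun st c => pvScanCell grid H W bg st r c) st)
      (List.replicate H (List.replicate W false), [])).2

def recolor_components_to_palette_py (grid : List (List Int)) (palette_freq : List (Int × Int)) : List (List Int) :=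
  let pfd := PySem.Dict.ofList palette_freq
  if pvIsRect grid = false ∨ pfd.size = 0 then grid
  else
    let allowed : PySem.Set Int := PySem.Set.ofList pfd.keys
    let ranked := PySem.List.sorted2 pfd.items (fun kv => -kv.2) (fun kv => kv.1) false
    let recolored := grid.map (fun row => row.map (fun x => x))  -- _copy_grid: fresh copy of each row
    let comps := pvConnComponents grid (some (pvModeColor grid))
    comps.foldl (fun rec comp =>
      match comp with
      | [] => rec  -- unreachable: every emitted component is nonempty
      | (r0, c0) :: _ =>
        let color := pvGet2 grid r0 c0
        if allowed.contains color then rec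
        else
          let best := pvBestColor ranked (comp.length : Int)
          comp.foldl (fun rec p => rec.set p.1 ((rec.getD p.1 []).set p.2 best)) rec) recolored

-- ===== PORT B =====
-- B finds the components by iterative minimum-label propagation over flat cell ids instead of BFS
def pvStepLabels (H W : Nat) (label : List Int) : List Int :=
  (List.range (H * W)).map (fun i =>
    let li := label.getD i 0
    if li < 0 then li
    else
      let r := i / W
      let c := i % W
      let m := li
      let m := if 0 < r ∧ 0 ≤ label.getD (i - W) 0 ∧ label.getD (i - W) 0 < m then label.getD (i - W) 0 else m
      let m := if r + 1 < H ∧ 0 ≤ label.getD (i + W) 0 ∧ label.getD (i + W) 0 < m then label.getD (i + W) 0 else m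
      let m := if 0 < c ∧ 0 ≤ label.getD (i - 1) 0 ∧ label.getD (i - 1) 0 < m then label.getD (i - 1) 0 else m
      let m := if c + 1 < W ∧ 0 ≤ label.getD (i + 1) 0 ∧ label.getD (i + 1) 0 < m then label.getD (i + 1) 0 else m
      m)

def pvPropagate (H W : Nat) : Nat → List Int → List Int
  | 0, label => label
  | fuel + 1, label =>
    let new := pvStepLabels H W label
    if new = label then label else pvPropagate H W fuel new

def recolor_components_to_palette_py_alt (grid : List (List Int)) (palette_freq : List (Int × Int)) : List (List Int) :=
  let pfd := PySem.Dict.ofList palette_freq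
  if pvIsRect grid = false ∨ pfd.size = 0 then grid
  else
    let allowed : PySem.Set Int := PySem.Set.ofList pfd.keys
    let ranked := PySem.List.sorted2 pfd.items (fun kv => -kv.2) (fun kv => kv.1) false
    let bg := pvModeColor grid
    let H := grid.length
    let W := (grid.getD 0 []).length
    let n := H * W
    let label0 : List Int := (List.range n).map (fun i => if pvGet2 grid (i / W) (i % W) == bg then -1 else (i : Int))
    let label := pvPropagate H W (n * n) label0
    let size : PySem.Dict Int Int := (List.range n).foldl (fun d i =>
      if 0 ≤ label.getD i 0 then d.insert (label.getD i 0) (d.getD (label.getD i 0) 0 + 1) else d)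
      PySem.Dict.empty
    let best : PySem.Dict Int Int := size.items.foldl
      (fun b p => b.insert p.1 (pvBestColor ranked p.2)) PySem.Dict.empty
    (List.range H).map (fun r => (List.range W).map (fun c =>
      let l := label.getD (r * W + c) 0
      if 0 ≤ l ∧ allowed.contains (pvGet2 grid (l.toNat / W) (l.toNat % W)) = false then best.getD l 0
      else pvGet2 grid r c))

-- ===== PRECONDITION & SPEC =====
def Spec_recolor_components_to_palette_py (grid : List (List Int)) (palette_freq : List (Int × Int)) (out : List (List Int)) : Prop := out = recolor_components_to_palette_py_alt grid palette_freq
instance (grid : List (List Int)) (palette_freq : List (Int × Int)) (out : List (List Int)) : Decidable (Spec_recolor_components_to_palette_py grid palette_freq out) := by unfold Spec_recolor_components_to_palette_py; infer_instance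

-- ===== CLAIM (what is proved, stated in full; the proofs are below) =====
def Claim_equal_recolor_components_to_palette_py : Prop := ∀ (grid : List (List Int)) (palette_freq : List (Int × Int)), Dom_recolor_components_to_palette_py grid palette_freq → Spec_recolor_components_to_palette_py grid palette_freq (recolor_components_to_palette_py grid palette_freq)


-- ===== LEMMAS AND PROOFS =====

-- ---------- proof-layer vocabulary ----------
def pvFg (grid : List (List Int)) (H W : Nat) (bgv : Int) (p : Nat × Nat) : Prop :=
  p.1 < H ∧ p.2 < W ∧ pvGet2 grid p.1 p.2 ≠ bgv

def pvAdj (p q : Nat × Nat) : Prop :=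
  (p.1 = q.1 ∧ (q.2 = p.2 + 1 ∨ p.2 = q.2 + 1)) ∨ (p.2 = q.2 ∧ (q.1 = p.1 + 1 ∨ p.1 = q.1 + 1))

def pvStepR (grid : List (List Int)) (H W : Nat) (bgv : Int) (p q : Nat × Nat) : Prop :=
  pvFg grid H W bgv p ∧ pvFg grid H W bgv q ∧ pvAdj p q

def pvReach (grid : List (List Int)) (H W : Nat) (bgv : Int) : Nat × Nat → Nat × Nat → Prop :=
  Relation.ReflTransGen (pvStepR grid H W bgv)

def pvShape (H W : Nat) (s : List (List Bool)) : Prop :=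
  s.length = H ∧ ∀ r, r < H → (s.getD r []).length = W

def pvUnseen (H W : Nat) (s : List (List Bool)) : Nat :=
  (List.range (H * W)).countP (fun i => !pvSeen s (i / W) (i % W))

def pvRect (grid : List (List Int)) (H W : Nat) : Prop :=
  grid.length = H ∧ 0 < H ∧ 0 < W ∧ ∀ r, r < H → (grid.getD r []).length = W

lemma pvAdj_symm {p q : Nat × Nat} (h : pvAdj p q) : pvAdj q p := by
  unfold pvAdj at *; omega

lemma pvStepR_symm {grid H W bgv} {p q : Nat × Nat} (h : pvStepR grid H W bgv p q) :
    pvStepR grid H W bgv q p := ⟨h.2.1, h.1, pvAdj_symm h.2.2⟩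

lemma pvReach_symm {grid H W bgv} {p q : Nat × Nat} (h : pvReach grid H W bgv p q) :
    pvReach grid H W bgv q p := by
  induction h with
  | refl => exact Relation.ReflTransGen.refl
  | tail _ hstep ih => exact Relation.ReflTransGen.head (pvStepR_symm hstep) ih

lemma pvRect_of_isRect {grid : List (List Int)} (h : pvIsRect grid = true) :
    pvRect grid grid.length (grid.getD 0 []).length := by
  match grid with
  | [] => simp [pvIsRect] at h
  | first :: rest =>
    rw [pvIsRect] at h
    by_cases hw : first.length == 0
    · rw [if_pos hw] at h; cases h
    · rw [if_neg hw] at h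
      simp only [List.all_eq_true, beq_iff_eq] at h
      have hw' : 0 < first.length := by simp only [beq_iff_eq] at hw; omega
      refine ⟨rfl, by simp, by simpa using hw', ?_⟩
      intro r hr
      have hr' : r < (first :: rest).length := hr
      have hmem : (first :: rest).getD r [] ∈ first :: rest := by
        rw [List.getD_eq_getElem _ _ hr']
        exact List.getElem_mem hr'
      simpa using h _ hmem

-- ---------- seen-matrix lemmas ----------
lemma pvShape_mark {H W : Nat} {s : List (List Bool)} (hs : pvShape H W s) (r c : Nat) :
    pvShape H W (pvMark s r c) := by
  obtain ⟨h1, h2⟩ := hs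
  refine ⟨by simp [pvMark, h1], ?_⟩
  intro r' hr'
  by_cases hrr : r' = r
  · subst hrr
    have hlt : r' < s.length := by omega
    rw [pvMark, List.getD_eq_getElem?_getD, List.getElem?_set_self hlt]
    simpa using h2 r' hr'
  · rw [pvMark, List.getD_eq_getElem?_getD, List.getElem?_set_ne (by omega : r ≠ r'),
      ← List.getD_eq_getElem?_getD]
    exact h2 r' hr'

lemma pvSeen_mark_self {H W : Nat} {s : List (List Bool)} (hs : pvShape H W s)
    {r c : Nat} (hr : r < H) (hc : c < W) : pvSeen (pvMark s r c) r c = true := by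
  obtain ⟨h1, h2⟩ := hs
  have hrs : r < s.length := by omega
  have hcs : c < (s[r]?.getD []).length := by
    have := h2 r hr; rw [List.getD_eq_getElem?_getD] at this; omega
  simp only [pvSeen, pvMark, List.getD_eq_getElem?_getD]
  rw [List.getElem?_set_self hrs]
  simp only [Option.getD_some]
  rw [List.getElem?_set_self hcs]
  rfl

lemma pvSeen_mark_other {s : List (List Bool)} {r c r' c' : Nat}
    (h : (r', c') ≠ (r, c)) : pvSeen (pvMark s r c) r' c' = pvSeen s r' c' := by
  by_cases hrr : r' = r
  · subst hrr
    have hcc : c' ≠ c := fun hc => h (by rw [hc])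
    by_cases hlt : r' < s.length
    · simp only [pvSeen, pvMark, List.getD_eq_getElem?_getD]
      rw [List.getElem?_set_self hlt]
      simp only [Option.getD_some]
      rw [List.getElem?_set_ne (Ne.symm hcc)]
    · rw [pvMark, List.set_eq_of_length_le (by omega)]
  · simp only [pvSeen, pvMark, List.getD_eq_getElem?_getD]
    rw [List.getElem?_set_ne (Ne.symm hrr)]


-- ---------- neighbour machinery for the BFS ----------
def pvDirs : List (Int × Int) := [(1, 0), (-1, 0), (0, 1), (0, -1)]

def pvNbr? (H W : Nat) (x : Nat × Nat) (d : Int × Int) : Option (Nat × Nat) :=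
  if 0 ≤ (x.1 : Int) + d.1 ∧ (x.1 : Int) + d.1 < (H : Int) ∧
     0 ≤ (x.2 : Int) + d.2 ∧ (x.2 : Int) + d.2 < (W : Int) then
    some (((x.1 : Int) + d.1).toNat, ((x.2 : Int) + d.2).toNat)
  else none

lemma pvBfsStep_eq (grid : List (List Int)) (H W : Nat) (bgv : Int) (rr cc : Nat)
    (st : List (Nat × Nat) × List (List Bool)) (d : Int × Int) :
    pvBfsStep grid H W (some bgv) rr cc st d =
      match pvNbr? H W (rr, cc) d with
      | none => st
      | some p =>
        if pvSeen st.2 p.1 p.2 = true then st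
        else if pvGet2 grid p.1 p.2 ≠ bgv then (st.1 ++ [p], pvMark st.2 p.1 p.2)
        else (st.1, pvMark st.2 p.1 p.2) := by
  by_cases hb : 0 ≤ (rr : Int) + d.1 ∧ (rr : Int) + d.1 < (H : Int) ∧
      0 ≤ (cc : Int) + d.2 ∧ (cc : Int) + d.2 < (W : Int)
  · simp only [pvNbr?, if_pos hb]
    by_cases hs : pvSeen st.2 ((rr : Int) + d.1).toNat ((cc : Int) + d.2).toNat = true
    · simp only [pvBfsStep]
      rw [if_neg (by simp [hs] : ¬ _)]
      simp [hs]
    · simp only [pvBfsStep]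
      rw [if_pos ⟨hb.1, hb.2.1, hb.2.2.1, hb.2.2.2, by simpa using hs⟩]
      simp [hs]
  · simp only [pvNbr?, if_neg hb]
    simp only [pvBfsStep]
    rw [if_neg (by tauto)]

lemma pvNbr?_some_bounds {H W : Nat} {x p : Nat × Nat} {d : Int × Int}
    (h : pvNbr? H W x d = some p) : p.1 < H ∧ p.2 < W := by
  unfold pvNbr? at h
  split at h
  · rename_i hb
    injection h with h
    subst h
    constructor <;> simp <;> omega
  · cases h

lemma pvNbr?_adj {H W : Nat} {x p : Nat × Nat} {d : Int × Int} (hd : d ∈ pvDirs)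
    (h : pvNbr? H W x d = some p) : pvAdj x p := by
  unfold pvNbr? at h
  split at h
  · rename_i hb
    injection h with h
    subst h
    simp only [pvDirs, List.mem_cons] at hd
    rcases hd with rfl | rfl | rfl | rfl | h' <;> first
      | (simp only [pvAdj]; simp only at hb ⊢; omega)
      | (exfalso; simp at h')
  · cases h

lemma pvNbr?_complete {H W : Nat} {x p : Nat × Nat} (hx1 : x.1 < H) (hx2 : x.2 < W)
    (hadj : pvAdj x p) (h1 : p.1 < H) (h2 : p.2 < W) :
    ∃ d ∈ pvDirs, pvNbr? H W x d = some p := by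
  obtain ⟨p1, p2⟩ := p
  simp only at h1 h2
  rcases hadj with ⟨he, hc | hc⟩ | ⟨he, hc | hc⟩ <;> simp only at he hc
  · refine ⟨(0, 1), by simp [pvDirs], ?_⟩
    unfold pvNbr?
    rw [if_pos (by refine ⟨by omega, by omega, by omega, by omega⟩)]
    simp only [Option.some.injEq, Prod.mk.injEq]
    refine ⟨by omega, by omega⟩
  · refine ⟨(0, -1), by simp [pvDirs], ?_⟩
    unfold pvNbr?
    rw [if_pos (by refine ⟨by omega, by omega, by omega, by omega⟩)]
    simp only [Option.some.injEq, Prod.mk.injEq]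
    refine ⟨by omega, by omega⟩
  · refine ⟨(1, 0), by simp [pvDirs], ?_⟩
    unfold pvNbr?
    rw [if_pos (by refine ⟨by omega, by omega, by omega, by omega⟩)]
    simp only [Option.some.injEq, Prod.mk.injEq]
    refine ⟨by omega, by omega⟩
  · refine ⟨(-1, 0), by simp [pvDirs], ?_⟩
    unfold pvNbr?
    rw [if_pos (by refine ⟨by omega, by omega, by omega, by omega⟩)]
    simp only [Option.some.injEq, Prod.mk.injEq]
    refine ⟨by omega, by omega⟩

-- ---------- unseen-count lemmas ----------
lemma pvSeen_mark_mono {s : List (List Bool)} {r c a b : Nat}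
    (h : pvSeen s a b = true) : pvSeen (pvMark s r c) a b = true := by
  by_cases hab : (a, b) = (r, c)
  · have ha : a = r := (Prod.mk.injEq .. ▸ hab).1
    have hb : b = c := (Prod.mk.injEq .. ▸ hab).2
    subst ha; subst hb
    by_cases hr : a < s.length
    · simp only [pvSeen, pvMark, List.getD_eq_getElem?_getD]
      rw [List.getElem?_set_self hr]
      simp only [Option.getD_some]
      by_cases hc : b < (s[a]?.getD []).length
      · rw [List.getElem?_set_self hc]; rfl
      · rw [List.set_eq_of_length_le (by omega)]
        simpa [pvSeen, List.getD_eq_getElem?_getD] using h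
    · rwa [pvMark, List.set_eq_of_length_le (by omega)]
  · rwa [pvSeen_mark_other hab]

lemma pv_countP_succ_le {l : List Nat} {p q : Nat → Bool} {i0 : Nat} (hnd : l.Nodup)
    (hmem : i0 ∈ l) (hp : p i0 = true) (hq : q i0 = false)
    (hcongr : ∀ i ∈ l, i ≠ i0 → q i = p i) : l.countP q + 1 ≤ l.countP p := by
  obtain ⟨l1, l2, rfl⟩ := List.append_of_mem hmem
  have hnotl1 : i0 ∉ l1 := fun hin =>
    (List.disjoint_of_nodup_append hnd) hin (by simp)
  have hnotl2 : i0 ∉ l2 := by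
    have := List.Nodup.of_append_right hnd
    rw [List.nodup_cons] at this
    exact this.1
  rw [List.countP_append, List.countP_append, List.countP_cons, List.countP_cons, hp, hq]
  simp only [Bool.false_eq_true, if_true, if_false]
  have e1 : l1.countP q = l1.countP p :=
    List.countP_congr (fun i hi => by rw [hcongr i (by simp [hi]) (fun he => hnotl1 (he ▸ hi))])
  have e2 : l2.countP q = l2.countP p :=
    List.countP_congr (fun i hi => by rw [hcongr i (by simp [hi]) (fun he => hnotl2 (he ▸ hi))])
  omega

lemma pvUnseen_mark_le {H W : Nat} (s : List (List Bool)) (r c : Nat) :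
    pvUnseen H W (pvMark s r c) ≤ pvUnseen H W s := by
  apply List.countP_mono_left
  intro i _ hi
  cases h' : pvSeen s (i / W) (i % W)
  · simp
  · exact absurd (pvSeen_mark_mono h') (by simpa using hi)

lemma pv_id_div {W r c : Nat} (h0W : 0 < W) (hc : c < W) : (r * W + c) / W = r := by
  rw [mul_comm, Nat.mul_add_div h0W, Nat.div_eq_of_lt hc, add_zero]

lemma pv_id_mod {W r c : Nat} (hc : c < W) : (r * W + c) % W = c := by
  rw [mul_comm, Nat.mul_add_mod, Nat.mod_eq_of_lt hc]

lemma pv_id_mem_range {H W r c : Nat} (hr : r < H) (hc : c < W) :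
    r * W + c ∈ List.range (H * W) := by
  rw [List.mem_range]
  calc r * W + c < r * W + W := by omega
  _ = (r + 1) * W := by ring
  _ ≤ H * W := Nat.mul_le_mul_right _ (by omega)

lemma pvUnseen_mark_lt {H W : Nat} {s : List (List Bool)} {r c : Nat}
    (hsh : pvShape H W s) (hr : r < H) (hc : c < W) (hun : pvSeen s r c = false) :
    pvUnseen H W (pvMark s r c) + 1 ≤ pvUnseen H W s := by
  have h0W : 0 < W := by omega
  apply pv_countP_succ_le (i0 := r * W + c) List.nodup_range (pv_id_mem_range hr hc)
  · rw [pv_id_div h0W hc, pv_id_mod hc, hun]; rfl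
  · rw [pv_id_div h0W hc, pv_id_mod hc, pvSeen_mark_self hsh hr hc]; rfl
  · intro i _ hne
    have hne' : (i / W, i % W) ≠ (r, c) := by
      intro hcon
      apply hne
      have h1 : i / W = r := (Prod.mk.injEq .. ▸ hcon).1
      have h2 : i % W = c := (Prod.mk.injEq .. ▸ hcon).2
      have hi : i = W * (i / W) + i % W := (Nat.div_add_mod i W).symm
      rw [h1, h2, mul_comm] at hi
      exact hi
    rw [pvSeen_mark_other hne']

-- ---------- the four-direction neighbour fold ----------
structure PvFoldOut (grid : List (List Int)) (H W : Nat) (bgv : Int) (rr cc : Nat)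
    (dirs : List (Int × Int)) (q : List (Nat × Nat)) (seen : List (List Bool))
    (st : List (Nat × Nat) × List (List Bool)) : Prop where
  shape : pvShape H W st.2
  mono : ∀ p : Nat × Nat, pvSeen seen p.1 p.2 = true → pvSeen st.2 p.1 p.2 = true
  newSeen : ∀ p : Nat × Nat, pvSeen st.2 p.1 p.2 = true →
    pvSeen seen p.1 p.2 = true ∨ ∃ d ∈ dirs, pvNbr? H W (rr, cc) d = some p
  covered : ∀ d ∈ dirs, ∀ p, pvNbr? H W (rr, cc) d = some p → pvSeen st.2 p.1 p.2 = true
  queue : ∃ new, st.1 = q ++ new ∧ new.Nodup ∧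
      (∀ p ∈ new, pvFg grid H W bgv p ∧ pvSeen seen p.1 p.2 = false ∧
        (∃ d ∈ dirs, pvNbr? H W (rr, cc) d = some p)) ∧
      (∀ p : Nat × Nat, (∃ d ∈ dirs, pvNbr? H W (rr, cc) d = some p) →
        pvFg grid H W bgv p → pvSeen seen p.1 p.2 = false → p ∈ new)
  budget : pvUnseen H W st.2 + st.1.length ≤ pvUnseen H W seen + q.length

lemma pvNbrFold_spec (grid : List (List Int)) (H W : Nat) (bgv : Int) (rr cc : Nat)
    (dirs : List (Int × Int)) (q : List (Nat × Nat)) (seen : List (List Bool))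
    (hsh : pvShape H W seen) :
    PvFoldOut grid H W bgv rr cc dirs q seen
      (dirs.foldl (pvBfsStep grid H W (some bgv) rr cc) (q, seen)) := by
  induction dirs generalizing q seen with
  | nil =>
    refine ⟨hsh, fun p h => h, fun p h => Or.inl h, by simp, ⟨[], by simp, List.nodup_nil,
      by simp, by simp⟩, by simp⟩
  | cons d rest ih =>
    rw [List.foldl_cons, pvBfsStep_eq]
    rcases hnb : pvNbr? H W (rr, cc) d with _ | p
    · simp only [hnb]
      have out := ih q seen hsh
      refine ⟨out.shape, out.mono, ?_, ?_, ?_, out.budget⟩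
      · intro p h
        rcases out.newSeen p h with h' | ⟨d', hd', hn⟩
        · exact Or.inl h'
        · exact Or.inr ⟨d', by simp [hd'], hn⟩
      · intro d' hd' p hp
        rcases List.mem_cons.mp hd' with rfl | hd''
        · rw [hnb] at hp; cases hp
        · exact out.covered d' hd'' p hp
      · obtain ⟨new, h1, h2, h3, h4⟩ := out.queue
        refine ⟨new, h1, h2, ?_, ?_⟩
        · intro p hp
          obtain ⟨a, b, c, hc1, hc2⟩ := h3 p hp
          exact ⟨a, b, c, by simp [hc1], hc2⟩
        · rintro p ⟨d', hd', hn⟩ hfg hun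
          rcases List.mem_cons.mp hd' with rfl | hd''
          · rw [hnb] at hn; cases hn
          · exact h4 p ⟨d', hd'', hn⟩ hfg hun
    · have hpb := pvNbr?_some_bounds hnb
      by_cases hsn : pvSeen seen p.1 p.2 = true
      · simp only [hnb]
        rw [if_pos hsn]
        have out := ih q seen hsh
        refine ⟨out.shape, out.mono, ?_, ?_, ?_, out.budget⟩
        · intro p' h
          rcases out.newSeen p' h with h' | ⟨d', hd', hn⟩
          · exact Or.inl h'
          · exact Or.inr ⟨d', by simp [hd'], hn⟩
        · intro d' hd' p' hp
          rcases List.mem_cons.mp hd' with rfl | hd''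
          · rw [hnb] at hp; injection hp with hp; subst hp
            exact out.mono p hsn
          · exact out.covered d' hd'' p' hp
        · obtain ⟨new, h1, h2, h3, h4⟩ := out.queue
          refine ⟨new, h1, h2, ?_, ?_⟩
          · intro p' hp
            obtain ⟨a, b, c, hc1, hc2⟩ := h3 p' hp
            exact ⟨a, b, c, by simp [hc1], hc2⟩
          · rintro p' ⟨d', hd', hn⟩ hfg hun
            rcases List.mem_cons.mp hd' with rfl | hd''
            · rw [hnb] at hn; injection hn with hn; subst hn
              rw [hsn] at hun; cases hun
            · exact h4 p' ⟨d', hd'', hn⟩ hfg hun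
      · have hun : pvSeen seen p.1 p.2 = false := by
          cases h : pvSeen seen p.1 p.2
          · rfl
          · exact absurd h hsn
        have hshm := pvShape_mark hsh p.1 p.2
        have hsnm : pvSeen (pvMark seen p.1 p.2) p.1 p.2 = true :=
          pvSeen_mark_self hsh hpb.1 hpb.2
        by_cases hval : pvGet2 grid p.1 p.2 ≠ bgv
        · simp only [hnb]
          rw [if_neg (by rw [hun]; simp), if_pos hval]
          have out := ih (q ++ [p]) (pvMark seen p.1 p.2) hshm
          have monoM : ∀ p' : Nat × Nat, pvSeen seen p'.1 p'.2 = true →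
              pvSeen (pvMark seen p.1 p.2) p'.1 p'.2 = true := fun p' h =>
            pvSeen_mark_mono h
          refine ⟨out.shape, fun p' h => out.mono p' (monoM p' h), ?_, ?_, ?_, ?_⟩
          · intro p' h
            rcases out.newSeen p' h with h' | ⟨d', hd', hn⟩
            · by_cases hpp : (p'.1, p'.2) = (p.1, p.2)
              · refine Or.inr ⟨d, by simp, ?_⟩
                rw [hnb]
                have : p' = p := Prod.ext (Prod.mk.injEq .. ▸ hpp).1 (Prod.mk.injEq .. ▸ hpp).2
                rw [this]
              · rw [pvSeen_mark_other hpp] at h'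
                exact Or.inl h'
            · exact Or.inr ⟨d', by simp [hd'], hn⟩
          · intro d' hd' p' hp
            rcases List.mem_cons.mp hd' with rfl | hd''
            · rw [hnb] at hp; injection hp with hp; subst hp
              exact out.mono p hsnm
            · exact out.covered d' hd'' p' hp
          · obtain ⟨new, h1, h2, h3, h4⟩ := out.queue
            refine ⟨p :: new, by simpa using h1, ?_, ?_, ?_⟩
            · rw [List.nodup_cons]
              refine ⟨fun hmem => ?_, h2⟩
              have := (h3 p hmem).2.1
              rw [hsnm] at this; cases this
            · intro p' hp'
              rcases List.mem_cons.mp hp' with rfl | hmem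
              · refine ⟨⟨hpb.1, hpb.2, hval⟩, hun, ⟨d, by simp, hnb⟩⟩
              · obtain ⟨a, b, c, hc1, hc2⟩ := h3 p' hmem
                refine ⟨a, ?_, c, by simp [hc1], hc2⟩
                by_cases hpp : (p'.1, p'.2) = (p.1, p.2)
                · have : p' = p := Prod.ext (Prod.mk.injEq .. ▸ hpp).1 (Prod.mk.injEq .. ▸ hpp).2
                  subst this; exact hun
                · rw [pvSeen_mark_other hpp] at b; exact b
            · intro p' hex hfg hun'
              by_cases hpp : p' = p
              · simp [hpp]
              · refine List.mem_cons_of_mem _ ?_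
                obtain ⟨d', hd', hn⟩ := hex
                rcases List.mem_cons.mp hd' with rfl | hd''
                · rw [hnb] at hn; injection hn with hn; exact absurd hn.symm hpp
                · refine h4 p' ⟨d', hd'', hn⟩ hfg ?_
                  have hpp' : (p'.1, p'.2) ≠ (p.1, p.2) := by
                    intro hcon
                    exact hpp (Prod.ext (Prod.mk.injEq .. ▸ hcon).1 (Prod.mk.injEq .. ▸ hcon).2)
                  rw [pvSeen_mark_other hpp']
                  exact hun'
          · have hb := out.budget
            have hlt := pvUnseen_mark_lt hsh hpb.1 hpb.2 hun
            simp only [List.length_append, List.length_cons, List.length_nil] at hb ⊢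
            omega
        · simp only [hnb]
          rw [if_neg (by rw [hun]; simp), if_neg hval]
          have out := ih q (pvMark seen p.1 p.2) hshm
          refine ⟨out.shape, fun p' h => out.mono p' (pvSeen_mark_mono h), ?_, ?_, ?_, ?_⟩
          · intro p' h
            rcases out.newSeen p' h with h' | ⟨d', hd', hn⟩
            · by_cases hpp : (p'.1, p'.2) = (p.1, p.2)
              · refine Or.inr ⟨d, by simp, ?_⟩
                rw [hnb]
                have : p' = p := Prod.ext (Prod.mk.injEq .. ▸ hpp).1 (Prod.mk.injEq .. ▸ hpp).2
                rw [this]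
              · rw [pvSeen_mark_other hpp] at h'
                exact Or.inl h'
            · exact Or.inr ⟨d', by simp [hd'], hn⟩
          · intro d' hd' p' hp
            rcases List.mem_cons.mp hd' with rfl | hd''
            · rw [hnb] at hp; injection hp with hp; subst hp
              exact out.mono p hsnm
            · exact out.covered d' hd'' p' hp
          · obtain ⟨new, h1, h2, h3, h4⟩ := out.queue
            refine ⟨new, h1, h2, ?_, ?_⟩
            · intro p' hmem
              obtain ⟨a, b, c, hc1, hc2⟩ := h3 p' hmem
              refine ⟨a, ?_, c, by simp [hc1], hc2⟩
              by_cases hpp : (p'.1, p'.2) = (p.1, p.2)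
              · have : p' = p := Prod.ext (Prod.mk.injEq .. ▸ hpp).1 (Prod.mk.injEq .. ▸ hpp).2
                subst this; exact hun
              · rw [pvSeen_mark_other hpp] at b; exact b
            · intro p' hex hfg hun'
              obtain ⟨d', hd', hn⟩ := hex
              rcases List.mem_cons.mp hd' with rfl | hd''
              · rw [hnb] at hn; injection hn with hn; subst hn
                exact absurd hfg.2.2 (by simpa using hval)
              · refine h4 p' ⟨d', hd'', hn⟩ hfg ?_
                by_cases hpp : (p'.1, p'.2) = (p.1, p.2)
                · have : p' = p := Prod.ext (Prod.mk.injEq .. ▸ hpp).1 (Prod.mk.injEq .. ▸ hpp).2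
                  subst this
                  exact absurd hfg.2.2 (by simpa using hval)
                · rw [pvSeen_mark_other hpp]; exact hun'
          · have hb := out.budget
            have hle := pvUnseen_mark_le (H := H) (W := W) seen p.1 p.2
            omega

-- ---------- BFS loop invariant ----------
structure PvBfsInv (grid : List (List Int)) (H W : Nat) (bgv : Int)
    (Done : Nat × Nat → Prop) (s : Nat × Nat) (fuel : Nat)
    (queue : List (Nat × Nat)) (seen : List (List Bool)) (comp : List (Nat × Nat)) : Prop where
  sh : pvShape H W seen
  fuelok : pvUnseen H W seen + queue.length ≤ fuel
  qfg : ∀ p ∈ queue, pvFg grid H W bgv p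
  qseen : ∀ p ∈ queue, pvSeen seen p.1 p.2 = true
  cfg : ∀ p ∈ comp, pvFg grid H W bgv p
  cseen : ∀ p ∈ comp, pvSeen seen p.1 p.2 = true
  cnd : comp.Nodup
  qnd : queue.Nodup
  dcq : ∀ p ∈ comp, p ∉ queue
  ccl : ∀ p ∈ comp, ∀ q' : Nat × Nat, pvAdj p q' → q'.1 < H → q'.2 < W →
    pvSeen seen q'.1 q'.2 = true
  cl : ∀ p : Nat × Nat, pvFg grid H W bgv p → pvSeen seen p.1 p.2 = true →
    Done p ∨ p ∈ comp ∨ p ∈ queue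
  reach : ∀ p : Nat × Nat, p ∈ comp ∨ p ∈ queue → pvReach grid H W bgv s p
  smem : s ∈ comp ∨ s ∈ queue
  dclosed : ∀ p q' : Nat × Nat, Done p → pvStepR grid H W bgv p q' → Done q'
  snd : ¬ Done s

structure PvBfsOut (grid : List (List Int)) (H W : Nat) (bgv : Int)
    (Done : Nat × Nat → Prop) (s : Nat × Nat)
    (queue : List (Nat × Nat)) (seen : List (List Bool)) (comp : List (Nat × Nat))
    (res : List (Nat × Nat) × List (List Bool)) : Prop where
  sh : pvShape H W res.2
  mono : ∀ p : Nat × Nat, pvSeen seen p.1 p.2 = true → pvSeen res.2 p.1 p.2 = true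
  first : ∀ (x : Nat × Nat) (rest' : List (Nat × Nat)), queue = x :: rest' →
    comp ++ [x] <+: res.1
  compsub : comp <+: res.1
  mem : ∀ p ∈ res.1, pvFg grid H W bgv p ∧ pvReach grid H W bgv s p
  nd : res.1.Nodup
  seenchar : ∀ p : Nat × Nat, pvFg grid H W bgv p → pvSeen res.2 p.1 p.2 = true →
    Done p ∨ p ∈ res.1
  compseen : ∀ p ∈ res.1, pvSeen res.2 p.1 p.2 = true
  complete : ∀ p : Nat × Nat, pvFg grid H W bgv p → pvReach grid H W bgv s p → p ∈ res.1
  ccl : ∀ p ∈ res.1, ∀ q' : Nat × Nat, pvAdj p q' → q'.1 < H → q'.2 < W →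
    pvSeen res.2 q'.1 q'.2 = true

lemma pvNotDone_reach {grid : List (List Int)} {H W : Nat} {bgv : Int}
    {Done : Nat × Nat → Prop} {s p : Nat × Nat}
    (hdc : ∀ p q' : Nat × Nat, Done p → pvStepR grid H W bgv p q' → Done q')
    (hs : ¬ Done s) (hr : pvReach grid H W bgv s p) : ¬ Done p := by
  intro hd
  apply hs
  have hr' := pvReach_symm hr
  clear hr hs
  induction hr' with
  | refl => exact hd
  | tail _ hstep ih => exact hdc _ _ ih hstep

lemma pvBfsTerminal {grid : List (List Int)} {H W : Nat} {bgv : Int}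
    {Done : Nat × Nat → Prop} {s : Nat × Nat} {fuel : Nat}
    {seen : List (List Bool)} {comp : List (Nat × Nat)}
    (inv : PvBfsInv grid H W bgv Done s fuel [] seen comp) :
    PvBfsOut grid H W bgv Done s [] seen comp (comp, seen) := by
  have hsmem : s ∈ comp := by
    rcases inv.smem with h | h
    · exact h
    · exact absurd h (List.not_mem_nil)
  refine ⟨inv.sh, fun p h => h, ?_, List.prefix_refl _,
    fun p hp => ⟨inv.cfg p hp, inv.reach p (Or.inl hp)⟩,
    inv.cnd, ?_, inv.cseen, ?_, inv.ccl⟩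
  · intro x r h
    exact absurd h (by simp)
  · intro p hfg hsn
    rcases inv.cl p hfg hsn with h | h | h
    · exact Or.inl h
    · exact Or.inr h
    · exact absurd h (List.not_mem_nil)
  · intro p hfg hr
    induction hr with
    | refl => exact hsmem
    | tail hpath hstep ih =>
      rename_i b p'
      have hbfg := hstep.1
      have hpfg := hstep.2.1
      have hb : b ∈ comp := ih hbfg
      have hsn : pvSeen seen p'.1 p'.2 = true :=
        inv.ccl b hb p' hstep.2.2 hpfg.1 hpfg.2.1
      rcases inv.cl p' hpfg hsn with h | h | h
      · exact absurd h (pvNotDone_reach inv.dclosed inv.snd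
          (Relation.ReflTransGen.tail hpath hstep))
      · exact h
      · exact absurd h (List.not_mem_nil)

lemma pvBfs_spec {grid : List (List Int)} {H W : Nat} {bgv : Int}
    {Done : Nat × Nat → Prop} {s : Nat × Nat} :
    ∀ (fuel : Nat) (queue : List (Nat × Nat)) (seen : List (List Bool))
      (comp : List (Nat × Nat)),
      PvBfsInv grid H W bgv Done s fuel queue seen comp →
      PvBfsOut grid H W bgv Done s queue seen comp
        (pvBfs grid H W (some bgv) fuel queue seen comp) := by
  intro fuel
  induction fuel with
  | zero =>
    intro queue seen comp inv
    have hq : queue = [] := by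
      have := inv.fuelok
      cases queue with
      | nil => rfl
      | cons a l => simp at this
    subst hq
    exact pvBfsTerminal inv
  | succ fuel ih =>
    intro queue seen comp inv
    cases queue with
    | nil => exact pvBfsTerminal inv
    | cons x rest =>
      obtain ⟨rr, cc⟩ := x
      have hxq : ((rr, cc) : Nat × Nat) ∈ (rr, cc) :: rest := by simp
      have hxfg := inv.qfg _ hxq
      have hxseen := inv.qseen _ hxq
      have out := pvNbrFold_spec grid H W bgv rr cc pvDirs rest seen inv.sh
      obtain ⟨new, hq1, hnewnd, hnewp, hnewc⟩ := out.queue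
      set st := pvDirs.foldl (pvBfsStep grid H W (some bgv) rr cc) (rest, seen) with hst
      have hunf : pvBfs grid H W (some bgv) (fuel + 1) ((rr, cc) :: rest) seen comp =
          pvBfs grid H W (some bgv) fuel st.1 st.2 (comp ++ [(rr, cc)]) := rfl
      rw [hunf]
      have hnewseen : ∀ p ∈ new, pvSeen st.2 p.1 p.2 = true := by
        intro p hp
        obtain ⟨_, _, d, hd, hn⟩ := hnewp p hp
        exact out.covered d hd p hn
      have hrestq : ∀ p ∈ rest, p ∈ (rr, cc) :: rest := fun p hp => List.mem_cons_of_mem _ hp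
      have hclcase : ∀ p : Nat × Nat, pvFg grid H W bgv p → pvSeen seen p.1 p.2 = true →
          Done p ∨ p ∈ comp ++ [(rr, cc)] ∨ p ∈ st.1 := by
        intro p hfg hold
        rcases inv.cl p hfg hold with h | h | h
        · exact Or.inl h
        · exact Or.inr (Or.inl (List.mem_append_left _ h))
        · rcases List.mem_cons.mp h with rfl | h'
          · exact Or.inr (Or.inl (List.mem_append_right _ (by simp)))
          · exact Or.inr (Or.inr (by rw [hq1]; exact List.mem_append_left _ h'))
      have inv' : PvBfsInv grid H W bgv Done s fuel st.1 st.2 (comp ++ [(rr, cc)]) := by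
        refine ⟨out.shape, ?_, ?_, ?_, ?_, ?_, ?_, ?_, ?_, ?_, ?_, ?_, ?_,
          inv.dclosed, inv.snd⟩
        · have hb := out.budget
          have hf := inv.fuelok
          simp only [List.length_cons] at hf
          omega
        · intro p hp
          rw [hq1] at hp
          rcases List.mem_append.mp hp with h | h
          · exact inv.qfg p (hrestq p h)
          · exact (hnewp p h).1
        · intro p hp
          rw [hq1] at hp
          rcases List.mem_append.mp hp with h | h
          · exact out.mono p (inv.qseen p (hrestq p h))
          · exact hnewseen p h
        · intro p hp
          rcases List.mem_append.mp hp with h | h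
          · exact inv.cfg p h
          · rw [List.mem_singleton.mp h]; exact hxfg
        · intro p hp
          rcases List.mem_append.mp hp with h | h
          · exact out.mono p (inv.cseen p h)
          · rw [List.mem_singleton.mp h]; exact out.mono _ hxseen
        · have hnot : ((rr, cc) : Nat × Nat) ∉ comp := fun hmem => inv.dcq _ hmem hxq
          rw [List.nodup_append]
          refine ⟨inv.cnd, by simp, ?_⟩
          intro a ha b hb
          rw [List.mem_singleton.mp hb]
          intro heq
          exact hnot (heq ▸ ha)
        · rw [hq1, List.nodup_append]
          refine ⟨(List.nodup_cons.mp inv.qnd).2, hnewnd, ?_⟩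
          intro a ha b hb heq
          subst heq
          exact absurd (inv.qseen a (hrestq a ha)) (by simp [(hnewp a hb).2.1])
        · intro p hp hq'
          rw [hq1] at hq'
          rcases List.mem_append.mp hp with h | h
          · rcases List.mem_append.mp hq' with h' | h'
            · exact inv.dcq p h (hrestq p h')
            · exact absurd (inv.cseen p h) (by simp [(hnewp p h').2.1])
          · rw [List.mem_singleton.mp h] at hq'
            rcases List.mem_append.mp hq' with h' | h'
            · exact absurd h' (List.nodup_cons.mp inv.qnd).1
            · exact absurd hxseen (by simp [(hnewp _ h').2.1])
        · intro p hp q' hadj h1 h2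
          rcases List.mem_append.mp hp with h | h
          · exact out.mono q' (inv.ccl p h q' hadj h1 h2)
          · rw [List.mem_singleton.mp h] at hadj
            obtain ⟨d, hd, hn⟩ := pvNbr?_complete hxfg.1 hxfg.2.1 hadj h1 h2
            exact out.covered d hd q' hn
        · intro p hfg hsn
          rcases out.newSeen p hsn with hold | ⟨d, hd, hn⟩
          · exact hclcase p hfg hold
          · by_cases hold2 : pvSeen seen p.1 p.2 = true
            · exact hclcase p hfg hold2
            · have hfalse : pvSeen seen p.1 p.2 = false := by
                cases h : pvSeen seen p.1 p.2
                · rfl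
                · exact absurd h hold2
              refine Or.inr (Or.inr ?_)
              rw [hq1]
              exact List.mem_append_right _ (hnewc p ⟨d, hd, hn⟩ hfg hfalse)
        · intro p hp
          rcases hp with h | h
          · rcases List.mem_append.mp h with h' | h'
            · exact inv.reach p (Or.inl h')
            · rw [List.mem_singleton.mp h']; exact inv.reach _ (Or.inr hxq)
          · rw [hq1] at h
            rcases List.mem_append.mp h with h' | h'
            · exact inv.reach p (Or.inr (hrestq p h'))
            · obtain ⟨hfg', _, d, hd, hn⟩ := hnewp p h'
              exact Relation.ReflTransGen.tail (inv.reach _ (Or.inr hxq))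
                ⟨hxfg, hfg', pvNbr?_adj hd hn⟩
        · rcases inv.smem with h | h
          · exact Or.inl (List.mem_append_left _ h)
          · rcases List.mem_cons.mp h with rfl | h'
            · exact Or.inl (List.mem_append_right _ (by simp))
            · exact Or.inr (by rw [hq1]; exact List.mem_append_left _ h')
      have out' := ih st.1 st.2 (comp ++ [(rr, cc)]) inv'
      refine ⟨out'.sh, fun p h => out'.mono p (out.mono p h), ?_, ?_, out'.mem, out'.nd,
        out'.seenchar, out'.compseen, out'.complete, out'.ccl⟩
      · intro x0 rest0 heq
        have hx0 : x0 = (rr, cc) := by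
          injection heq with h1 h2
          exact h1.symm
        rw [hx0]
        exact out'.compsub
      · exact List.IsPrefix.trans (List.prefix_append comp [(rr, cc)]) out'.compsub

-- ---------- B-side: label propagation ----------
def pvGoodL (grid : List (List Int)) (H W : Nat) (bgv : Int) (L : List Int) : Prop :=
  L.length = H * W ∧ ∀ i, i < H * W →
    (¬ pvFg grid H W bgv (i / W, i % W) → L.getD i 0 = -1) ∧
    (pvFg grid H W bgv (i / W, i % W) →
      (∃ j, j < H * W ∧ pvFg grid H W bgv (j / W, j % W) ∧
        pvReach grid H W bgv (i / W, i % W) (j / W, j % W) ∧ L.getD i 0 = (j : Int)) ∧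
      L.getD i 0 ≤ (i : Int))

lemma pvMapRange_getD {α : Type} [Inhabited α] (m i : Nat) (f : Nat → α) (d : α) (hi : i < m) :
    ((List.range m).map f).getD i d = f i := by
  rw [List.getD_eq_getElem?_getD, List.getElem?_map, List.getElem?_range hi]
  rfl

lemma pvStepLabels_getD (H W : Nat) (L : List Int) (i : Nat) (hi : i < H * W) :
    (pvStepLabels H W L).getD i 0 =
      (let li := L.getD i 0
      if li < 0 then li
      else
        let r := i / W
        let c := i % W
        let m := li
        let m := if 0 < r ∧ 0 ≤ L.getD (i - W) 0 ∧ L.getD (i - W) 0 < m then L.getD (i - W) 0 else m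
        let m := if r + 1 < H ∧ 0 ≤ L.getD (i + W) 0 ∧ L.getD (i + W) 0 < m then L.getD (i + W) 0 else m
        let m := if 0 < c ∧ 0 ≤ L.getD (i - 1) 0 ∧ L.getD (i - 1) 0 < m then L.getD (i - 1) 0 else m
        let m := if c + 1 < W ∧ 0 ≤ L.getD (i + 1) 0 ∧ L.getD (i + 1) 0 < m then L.getD (i + 1) 0 else m
        m) := by
  rw [pvStepLabels, pvMapRange_getD _ _ _ _ hi]

lemma pvStepLabels_length (H W : Nat) (L : List Int) : (pvStepLabels H W L).length = H * W := by
  simp [pvStepLabels]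

-- cell-id geometry
lemma pv_unid_lt {H W i : Nat} (h0W : 0 < W) (hi : i < H * W) : i / W < H ∧ i % W < W := by
  rw [mul_comm] at hi
  exact ⟨Nat.div_lt_of_lt_mul hi, Nat.mod_lt _ h0W⟩

lemma pv_id_of_unid {W i : Nat} (h0W : 0 < W) : (i / W) * W + i % W = i := by
  rw [mul_comm]
  exact Nat.div_add_mod i W

lemma pv_adj_up {H W i : Nat} (h0W : 0 < W) (hi : i < H * W) (hr : 0 < i / W) :
    i - W < H * W ∧ (i - W) / W = i / W - 1 ∧ (i - W) % W = i % W ∧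
      pvAdj (i / W, i % W) ((i - W) / W, (i - W) % W) := by
  have hid := pv_id_of_unid (i := i) h0W
  have hmlt : i % W < W := Nat.mod_lt _ h0W
  obtain ⟨q', hq'⟩ : ∃ q', i / W = q' + 1 := ⟨i / W - 1, by omega⟩
  have h1 : i = (q' + 1) * W + i % W := by rw [← hq']; omega
  have h2 : (q' + 1) * W = q' * W + W := by ring
  have he : i - W = q' * W + i % W := by omega
  have hdiv : (i - W) / W = i / W - 1 := by rw [he, pv_id_div h0W hmlt]; omega
  have hmod : (i - W) % W = i % W := by rw [he, pv_id_mod hmlt]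
  refine ⟨by omega, hdiv, hmod, ?_⟩
  rw [hdiv, hmod]
  right
  exact ⟨rfl, Or.inr (by omega)⟩

lemma pv_adj_down {H W i : Nat} (h0W : 0 < W) (hi : i < H * W) (hr : i / W + 1 < H) :
    i + W < H * W ∧ (i + W) / W = i / W + 1 ∧ (i + W) % W = i % W ∧
      pvAdj (i / W, i % W) ((i + W) / W, (i + W) % W) := by
  have hid := pv_id_of_unid (i := i) h0W
  have hmlt : i % W < W := Nat.mod_lt _ h0W
  have h2 : (i / W + 1) * W = (i / W) * W + W := by ring
  have he : i + W = (i / W + 1) * W + i % W := by omega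
  have hdiv : (i + W) / W = i / W + 1 := by rw [he, pv_id_div h0W hmlt]
  have hmod : (i + W) % W = i % W := by rw [he, pv_id_mod hmlt]
  have h3 : (i / W + 2) * W = (i / W + 1) * W + W := by ring
  have h4 : (i / W + 2) * W ≤ H * W := Nat.mul_le_mul_right W (by omega)
  refine ⟨by omega, hdiv, hmod, ?_⟩
  rw [hdiv, hmod]
  right
  exact ⟨rfl, Or.inl rfl⟩

lemma pv_adj_left {H W i : Nat} (h0W : 0 < W) (hi : i < H * W) (hc : 0 < i % W) :
    i - 1 < H * W ∧ (i - 1) / W = i / W ∧ (i - 1) % W = i % W - 1 ∧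
      pvAdj (i / W, i % W) ((i - 1) / W, (i - 1) % W) := by
  have hid := pv_id_of_unid (i := i) h0W
  have hmlt : i % W < W := Nat.mod_lt _ h0W
  have he : i - 1 = (i / W) * W + (i % W - 1) := by omega
  have hdiv : (i - 1) / W = i / W := by rw [he, pv_id_div h0W (by omega)]
  have hmod : (i - 1) % W = i % W - 1 := by rw [he, pv_id_mod (by omega)]
  refine ⟨by omega, hdiv, hmod, ?_⟩
  rw [hdiv, hmod]
  left
  exact ⟨rfl, Or.inr (by omega)⟩

lemma pv_adj_right {H W i : Nat} (h0W : 0 < W) (hi : i < H * W) (hc : i % W + 1 < W) :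
    i + 1 < H * W ∧ (i + 1) / W = i / W ∧ (i + 1) % W = i % W + 1 ∧
      pvAdj (i / W, i % W) ((i + 1) / W, (i + 1) % W) := by
  have hid := pv_id_of_unid (i := i) h0W
  have hmlt : i % W < W := Nat.mod_lt _ h0W
  have he : i + 1 = (i / W) * W + (i % W + 1) := by omega
  have hdiv : (i + 1) / W = i / W := by rw [he, pv_id_div h0W (by omega)]
  have hmod : (i + 1) % W = i % W + 1 := by rw [he, pv_id_mod (by omega)]
  have h3 : (i / W + 1) * W = (i / W) * W + W := by ring
  have h4 : (i / W + 1) * W ≤ H * W :=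
    Nat.mul_le_mul_right W (by have := (pv_unid_lt h0W hi).1; omega)
  refine ⟨by omega, hdiv, hmod, ?_⟩
  rw [hdiv, hmod]
  left
  exact ⟨rfl, Or.inl rfl⟩

lemma pvAdj_id_cases {H W i j : Nat} (h0W : 0 < W) (hi : i < H * W) (hj : j < H * W)
    (hadj : pvAdj (i / W, i % W) (j / W, j % W)) :
    (0 < i / W ∧ j = i - W) ∨ (i / W + 1 < H ∧ j = i + W) ∨
    (0 < i % W ∧ j = i - 1) ∨ (i % W + 1 < W ∧ j = i + 1) := by
  have hidi := pv_id_of_unid (i := i) h0W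
  have hidj := pv_id_of_unid (i := j) h0W
  have hmi : i % W < W := Nat.mod_lt _ h0W
  have hmj : j % W < W := Nat.mod_lt _ h0W
  have hdj : j / W < H := (pv_unid_lt h0W hj).1
  have hdi : i / W < H := (pv_unid_lt h0W hi).1
  rcases hadj with ⟨he, hc | hc⟩ | ⟨he, hc | hc⟩ <;> simp only at he hc
  case inl.inl =>
    have hp : (j / W) * W = (i / W) * W := by rw [he]
    omega
  case inl.inr =>
    have hp : (j / W) * W = (i / W) * W := by rw [he]
    omega
  case inr.inl =>
    have hp : (j / W) * W = (i / W + 1) * W := by rw [hc]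
    have hq : (i / W + 1) * W = (i / W) * W + W := by ring
    omega
  case inr.inr =>
    have hp : (i / W) * W = (j / W + 1) * W := by rw [hc]
    have hq : (j / W + 1) * W = (j / W) * W + W := by ring
    have h0 : 0 < i / W := by rw [hc]; exact Nat.succ_pos _
    have he1 : i = j + W := by omega
    exact Or.inl ⟨h0, by omega⟩

lemma pvStep_le {H W : Nat} {L : List Int} {i : Nat} (hi : i < H * W) :
    (pvStepLabels H W L).getD i 0 ≤ L.getD i 0 := by
  rw [pvStepLabels_getD _ _ _ _ hi]
  dsimp only
  split_ifs <;> omega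

lemma pvStep_cases {H W : Nat} {L : List Int} {i : Nat} (hi : i < H * W) :
    (pvStepLabels H W L).getD i 0 = L.getD i 0 ∨
    (0 < i / W ∧ 0 ≤ L.getD (i - W) 0 ∧ (pvStepLabels H W L).getD i 0 = L.getD (i - W) 0) ∨
    (i / W + 1 < H ∧ 0 ≤ L.getD (i + W) 0 ∧ (pvStepLabels H W L).getD i 0 = L.getD (i + W) 0) ∨
    (0 < i % W ∧ 0 ≤ L.getD (i - 1) 0 ∧ (pvStepLabels H W L).getD i 0 = L.getD (i - 1) 0) ∨
    (i % W + 1 < W ∧ 0 ≤ L.getD (i + 1) 0 ∧ (pvStepLabels H W L).getD i 0 = L.getD (i + 1) 0) := by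
  rw [pvStepLabels_getD _ _ _ _ hi]
  dsimp only
  split_ifs <;> omega

lemma pvStep_le_up {H W : Nat} {L : List Int} {i : Nat} (hi : i < H * W)
    (hg : 0 < i / W) (hnb : 0 ≤ L.getD (i - W) 0) :
    (pvStepLabels H W L).getD i 0 ≤ L.getD (i - W) 0 := by
  rw [pvStepLabels_getD _ _ _ _ hi]
  dsimp only
  split_ifs <;> omega

lemma pvStep_le_down {H W : Nat} {L : List Int} {i : Nat} (hi : i < H * W)
    (hg : i / W + 1 < H) (hnb : 0 ≤ L.getD (i + W) 0) :
    (pvStepLabels H W L).getD i 0 ≤ L.getD (i + W) 0 := by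
  rw [pvStepLabels_getD _ _ _ _ hi]
  dsimp only
  split_ifs <;> omega

lemma pvStep_le_left {H W : Nat} {L : List Int} {i : Nat} (hi : i < H * W)
    (hg : 0 < i % W) (hnb : 0 ≤ L.getD (i - 1) 0) :
    (pvStepLabels H W L).getD i 0 ≤ L.getD (i - 1) 0 := by
  rw [pvStepLabels_getD _ _ _ _ hi]
  dsimp only
  split_ifs <;> omega

lemma pvStep_le_right {H W : Nat} {L : List Int} {i : Nat} (hi : i < H * W)
    (hg : i % W + 1 < W) (hnb : 0 ≤ L.getD (i + 1) 0) :
    (pvStepLabels H W L).getD i 0 ≤ L.getD (i + 1) 0 := by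
  rw [pvStepLabels_getD _ _ _ _ hi]
  dsimp only
  split_ifs <;> omega

lemma pvGoodL_nonneg_iff {grid : List (List Int)} {H W : Nat} {bgv : Int} {L : List Int}
    (hg : pvGoodL grid H W bgv L) {i : Nat} (hi : i < H * W) :
    (0 ≤ L.getD i 0 ↔ pvFg grid H W bgv (i / W, i % W)) := by
  constructor
  · intro h
    by_contra hfg
    have := ((hg.2 i hi).1 hfg)
    omega
  · intro hfg
    obtain ⟨⟨j, _, _, _, hj⟩, _⟩ := (hg.2 i hi).2 hfg
    rw [hj]
    exact Int.natCast_nonneg j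

lemma pvGoodL_step {grid : List (List Int)} {H W : Nat} {bgv : Int} {L : List Int}
    (h0W : 0 < W) (hg : pvGoodL grid H W bgv L) :
    pvGoodL grid H W bgv (pvStepLabels H W L) := by
  refine ⟨pvStepLabels_length H W L, ?_⟩
  intro i hi
  constructor
  · intro hfg
    have hL : L.getD i 0 = -1 := (hg.2 i hi).1 hfg
    rw [pvStepLabels_getD _ _ _ _ hi]
    simp only [hL]
    norm_num
  · intro hfg
    have hle : (pvStepLabels H W L).getD i 0 ≤ (i : Int) :=
      le_trans (pvStep_le hi) ((hg.2 i hi).2 hfg).2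
    refine ⟨?_, hle⟩
    rcases pvStep_cases (L := L) hi with h | ⟨hgd, hnb, h⟩ | ⟨hgd, hnb, h⟩ | ⟨hgd, hnb, h⟩ | ⟨hgd, hnb, h⟩
    · rw [h]; exact ((hg.2 i hi).2 hfg).1
    · obtain ⟨hlt, hdiv, hmod, hadj⟩ := pv_adj_up h0W hi hgd
      have hfgnb : pvFg grid H W bgv ((i - W) / W, (i - W) % W) :=
        (pvGoodL_nonneg_iff hg hlt).mp hnb
      obtain ⟨⟨j, hj1, hj2, hj3, hj4⟩, _⟩ := (hg.2 (i - W) hlt).2 hfgnb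
      exact ⟨j, hj1, hj2, Relation.ReflTransGen.head ⟨hfg, hfgnb, hadj⟩ hj3, by rw [h]; exact hj4⟩
    · obtain ⟨hlt, hdiv, hmod, hadj⟩ := pv_adj_down h0W hi hgd
      have hfgnb : pvFg grid H W bgv ((i + W) / W, (i + W) % W) :=
        (pvGoodL_nonneg_iff hg hlt).mp hnb
      obtain ⟨⟨j, hj1, hj2, hj3, hj4⟩, _⟩ := (hg.2 (i + W) hlt).2 hfgnb
      exact ⟨j, hj1, hj2, Relation.ReflTransGen.head ⟨hfg, hfgnb, hadj⟩ hj3, by rw [h]; exact hj4⟩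
    · obtain ⟨hlt, hdiv, hmod, hadj⟩ := pv_adj_left h0W hi hgd
      have hfgnb : pvFg grid H W bgv ((i - 1) / W, (i - 1) % W) :=
        (pvGoodL_nonneg_iff hg hlt).mp hnb
      obtain ⟨⟨j, hj1, hj2, hj3, hj4⟩, _⟩ := (hg.2 (i - 1) hlt).2 hfgnb
      exact ⟨j, hj1, hj2, Relation.ReflTransGen.head ⟨hfg, hfgnb, hadj⟩ hj3, by rw [h]; exact hj4⟩
    · obtain ⟨hlt, hdiv, hmod, hadj⟩ := pv_adj_right h0W hi hgd
      have hfgnb : pvFg grid H W bgv ((i + 1) / W, (i + 1) % W) :=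
        (pvGoodL_nonneg_iff hg hlt).mp hnb
      obtain ⟨⟨j, hj1, hj2, hj3, hj4⟩, _⟩ := (hg.2 (i + 1) hlt).2 hfgnb
      exact ⟨j, hj1, hj2, Relation.ReflTransGen.head ⟨hfg, hfgnb, hadj⟩ hj3, by rw [h]; exact hj4⟩

lemma pvListExt {L M : List Int} (hlen : L.length = M.length)
    (h : ∀ i, i < L.length → L.getD i 0 = M.getD i 0) : L = M := by
  apply List.ext_getElem hlen
  intro i h1 h2
  have := h i h1
  rwa [List.getD_eq_getElem _ _ h1, List.getD_eq_getElem _ _ h2] at this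

def pvMu (H W : Nat) (L : List Int) : Nat :=
  ((List.range (H * W)).map (fun i => ((L.getD i 0) + 1).toNat)).sum

lemma pvMu_lt_of_ne {grid : List (List Int)} {H W : Nat} {bgv : Int} {L : List Int}
    (hg : pvGoodL grid H W bgv L) (hne : pvStepLabels H W L ≠ L) :
    pvMu H W (pvStepLabels H W L) < pvMu H W L := by
  have hex : ∃ i, i < H * W ∧ (pvStepLabels H W L).getD i 0 ≠ L.getD i 0 := by
    by_contra hall
    push_neg at hall
    exact hne (pvListExt (by rw [pvStepLabels_length, hg.1]) (by
      intro i hilen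
      rw [pvStepLabels_length] at hilen
      exact hall i hilen))
  obtain ⟨i0, hi0, hne0⟩ := hex
  apply List.sum_lt_sum
  · intro i hiin
    have hi : i < H * W := List.mem_range.mp hiin
    have := pvStep_le (L := L) hi
    omega
  · refine ⟨i0, List.mem_range.mpr hi0, ?_⟩
    have hle := pvStep_le (L := L) hi0
    have hlnn : 0 ≤ L.getD i0 0 := by
      by_contra hneg
      have hnotfg : ¬ pvFg grid H W bgv (i0 / W, i0 % W) := by
        intro hfg
        have := (pvGoodL_nonneg_iff hg hi0).mpr hfg
        omega
      have h1 := (hg.2 i0 hi0).1 hnotfg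
      have h2 : (pvStepLabels H W L).getD i0 0 = L.getD i0 0 := by
        rw [pvStepLabels_getD _ _ _ _ hi0]
        simp only [h1]
        norm_num
      exact hne0 h2
    omega

lemma pvPropagate_fixpoint {grid : List (List Int)} {H W : Nat} {bgv : Int} (h0W : 0 < W) :
    ∀ (f : Nat) (L : List Int), pvGoodL grid H W bgv L → pvMu H W L ≤ f →
      pvGoodL grid H W bgv (pvPropagate H W f L) ∧
        pvStepLabels H W (pvPropagate H W f L) = pvPropagate H W f L := by
  intro f
  induction f with
  | zero =>
    intro L hg hmu
    have hfix : pvStepLabels H W L = L := by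
      apply pvListExt (by rw [pvStepLabels_length, hg.1])
      intro i hilen
      rw [pvStepLabels_length] at hilen
      have hterm : ((L.getD i 0) + 1).toNat = 0 := by
        have hsum : pvMu H W L = 0 := by omega
        have := List.sum_eq_zero_iff.mp (by exact hsum) (((L.getD i 0) + 1).toNat)
        apply this
        exact List.mem_map.mpr ⟨i, List.mem_range.mpr hilen, rfl⟩
      have hneg : L.getD i 0 < 0 := by omega
      rw [pvStepLabels_getD _ _ _ _ hilen]
      simp only [if_pos hneg]
    exact ⟨by simpa [pvPropagate] using hg, by simpa [pvPropagate] using hfix⟩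
  | succ f ihf =>
    intro L hg hmu
    rw [pvPropagate]
    by_cases hnew : pvStepLabels H W L = L
    · rw [if_pos hnew]
      exact ⟨hg, hnew⟩
    · rw [if_neg hnew]
      have hlt := pvMu_lt_of_ne hg hnew
      exact ihf _ (pvGoodL_step h0W hg) (by omega)

lemma pvFix_adj_eq {grid : List (List Int)} {H W : Nat} {bgv : Int} {L : List Int}
    (h0W : 0 < W) (hg : pvGoodL grid H W bgv L) (hfix : pvStepLabels H W L = L)
    {i j : Nat} (hi : i < H * W) (hj : j < H * W)
    (hfgj : pvFg grid H W bgv (j / W, j % W))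
    (hadj : pvAdj (i / W, i % W) (j / W, j % W)) :
    L.getD i 0 ≤ L.getD j 0 := by
  have hnbj : 0 ≤ L.getD j 0 := (pvGoodL_nonneg_iff hg hj).mpr hfgj
  rcases pvAdj_id_cases h0W hi hj hadj with ⟨hgd, rfl⟩ | ⟨hgd, rfl⟩ | ⟨hgd, rfl⟩ | ⟨hgd, rfl⟩
  · conv_lhs => rw [← hfix]
    exact pvStep_le_up hi hgd hnbj
  · conv_lhs => rw [← hfix]
    exact pvStep_le_down hi hgd hnbj
  · conv_lhs => rw [← hfix]
    exact pvStep_le_left hi hgd hnbj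
  · conv_lhs => rw [← hfix]
    exact pvStep_le_right hi hgd hnbj

lemma pv_pair_id {H W : Nat} (h0W : 0 < W) {p : Nat × Nat} (h1 : p.1 < H) (h2 : p.2 < W) :
    p.1 * W + p.2 < H * W ∧ (p.1 * W + p.2) / W = p.1 ∧ (p.1 * W + p.2) % W = p.2 := by
  refine ⟨?_, pv_id_div h0W h2, pv_id_mod h2⟩
  have h3 : (p.1 + 1) * W = p.1 * W + W := by ring
  have h4 : (p.1 + 1) * W ≤ H * W := Nat.mul_le_mul_right W (by omega)
  omega

lemma pvFix_reach_eq {grid : List (List Int)} {H W : Nat} {bgv : Int} {L : List Int}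
    (h0W : 0 < W) (hg : pvGoodL grid H W bgv L) (hfix : pvStepLabels H W L = L)
    {i j : Nat} (hi : i < H * W) (hj : j < H * W)
    (hr : pvReach grid H W bgv (i / W, i % W) (j / W, j % W)) :
    L.getD i 0 = L.getD j 0 := by
  -- generalize the endpoint to a pair
  have main : ∀ p : Nat × Nat, pvReach grid H W bgv (i / W, i % W) p →
      L.getD i 0 = L.getD (p.1 * W + p.2) 0 := by
    intro p hp
    induction hp with
    | refl =>
      have : (i / W) * W + i % W = i := pv_id_of_unid h0W
      rw [this]
    | tail hpath hstep ihp =>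
      rename_i b c
      have hbfg := hstep.1
      have hcfg := hstep.2.1
      obtain ⟨hblt, hbdiv, hbmod⟩ := pv_pair_id (H := H) h0W hbfg.1 hbfg.2.1
      obtain ⟨hclt, hcdiv, hcmod⟩ := pv_pair_id (H := H) h0W hcfg.1 hcfg.2.1
      have hadj : pvAdj ((b.1 * W + b.2) / W, (b.1 * W + b.2) % W)
          ((c.1 * W + c.2) / W, (c.1 * W + c.2) % W) := by
        rw [hbdiv, hbmod, hcdiv, hcmod]
        exact hstep.2.2
      have hfgb' : pvFg grid H W bgv ((b.1 * W + b.2) / W, (b.1 * W + b.2) % W) := by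
        rw [hbdiv, hbmod]; exact hbfg
      have hfgc' : pvFg grid H W bgv ((c.1 * W + c.2) / W, (c.1 * W + c.2) % W) := by
        rw [hcdiv, hcmod]; exact hcfg
      have h1 : L.getD (b.1 * W + b.2) 0 ≤ L.getD (c.1 * W + c.2) 0 :=
        pvFix_adj_eq h0W hg hfix hblt hclt hfgc' hadj
      have h2 : L.getD (c.1 * W + c.2) 0 ≤ L.getD (b.1 * W + b.2) 0 :=
        pvFix_adj_eq h0W hg hfix hclt hblt hfgb' (pvAdj_symm hadj)
      rw [ihp]
      omega
  have := main (j / W, j % W) hr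
  simpa [pv_id_of_unid h0W] using this

-- ---------- Int-grid update lemmas and scan-order infrastructure ----------
def pvShapeI (H W : Nat) (g : List (List Int)) : Prop :=
  g.length = H ∧ ∀ r, r < H → (g.getD r []).length = W

lemma pvShapeI_set2 {H W : Nat} {g : List (List Int)} (hs : pvShapeI H W g) (r c : Nat) (v : Int) :
    pvShapeI H W (g.set r ((g.getD r []).set c v)) := by
  obtain ⟨h1, h2⟩ := hs
  refine ⟨by simp [h1], ?_⟩
  intro r' hr'
  by_cases hrr : r' = r
  · subst hrr
    have hlt : r' < g.length := by omega
    rw [List.getD_eq_getElem?_getD, List.getElem?_set_self hlt]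
    simpa using h2 r' hr'
  · rw [List.getD_eq_getElem?_getD, List.getElem?_set_ne (by omega : r ≠ r'),
      ← List.getD_eq_getElem?_getD]
    exact h2 r' hr'

lemma pvGet2_set2_self {H W : Nat} {g : List (List Int)} (hs : pvShapeI H W g)
    {r c : Nat} (hr : r < H) (hc : c < W) (v : Int) :
    pvGet2 (g.set r ((g.getD r []).set c v)) r c = v := by
  obtain ⟨h1, h2⟩ := hs
  have hrs : r < g.length := by omega
  have hcs : c < (g[r]?.getD []).length := by
    have := h2 r hr; rw [List.getD_eq_getElem?_getD] at this; omega
  simp only [pvGet2, List.getD_eq_getElem?_getD]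
  rw [List.getElem?_set_self hrs]
  simp only [Option.getD_some]
  rw [List.getElem?_set_self hcs]
  rfl

lemma pvGet2_set2_other {g : List (List Int)} {r c r' c' : Nat}
    (h : (r', c') ≠ (r, c)) (v : Int) :
    pvGet2 (g.set r ((g.getD r []).set c v)) r' c' = pvGet2 g r' c' := by
  by_cases hrr : r' = r
  · subst hrr
    have hcc : c' ≠ c := fun hcon => h (by rw [hcon])
    by_cases hlt : r' < g.length
    · simp only [pvGet2, List.getD_eq_getElem?_getD]
      rw [List.getElem?_set_self hlt]
      simp only [Option.getD_some]
      rw [List.getElem?_set_ne (Ne.symm hcc)]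
    · rw [List.set_eq_of_length_le (by omega)]
  · simp only [pvGet2, List.getD_eq_getElem?_getD]
    rw [List.getElem?_set_ne (Ne.symm hrr)]

lemma pvShape_replicate (H W : Nat) : pvShape H W (List.replicate H (List.replicate W false)) := by
  refine ⟨by simp, ?_⟩
  intro r hr
  rw [List.getD_eq_getElem?_getD, List.getElem?_replicate_of_lt (by omega)]
  simp

lemma pvSeen_replicate (H W a b : Nat) :
    pvSeen (List.replicate H (List.replicate W false)) a b = false := by
  simp only [pvSeen, List.getD_eq_getElem?_getD]
  by_cases ha : a < H
  · rw [List.getElem?_replicate_of_lt (by omega)]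
    simp only [Option.getD_some]
    by_cases hb : b < W
    · rw [List.getElem?_replicate_of_lt (by omega)]
      rfl
    · rw [List.getElem?_eq_none (by simp only [List.length_replicate]; omega)]
      rfl
  · have hnone : (List.replicate H (List.replicate W false))[a]? = none :=
      List.getElem?_eq_none (by simp only [List.length_replicate]; omega)
    rw [hnone]
    rfl

lemma pvRowFold {σ : Type} (f : σ → Nat → Nat → σ) (H W : Nat) (h0W : 0 < W) (init : σ) :
    (List.range H).foldl (fun st r => (List.range W).foldl (fun st c => f st r c) st) init =
      (List.range (H * W)).foldl (fun st i => f st (i / W) (i % W)) init := by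
  induction H generalizing init with
  | zero => simp
  | succ H ihH =>
    rw [List.range_succ, List.foldl_append, ihH]
    have he : (H + 1) * W = H * W + W := by ring
    rw [he, List.range_add, List.foldl_append, List.foldl_map]
    simp only [List.foldl_cons, List.foldl_nil]
    refine PySem.List.foldl_congr_mem _ _ _ _ ?_
    intro acc c hc
    have hcW : c < W := List.mem_range.mp hc
    rw [pv_id_div h0W hcW, pv_id_mod hcW]

-- ---------- outer scan loop ----------
structure PvScanInv (grid : List (List Int)) (H W : Nat) (bgv : Int) (k : Nat)
    (st : List (List Bool) × List (List (Nat × Nat))) : Prop where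
  sh : pvShape H W st.1
  proc : ∀ j, j < k → j < H * W → pvSeen st.1 (j / W) (j % W) = true
  charF : ∀ p : Nat × Nat, pvFg grid H W bgv p → pvSeen st.1 p.1 p.2 = true →
    ∃ c ∈ st.2, p ∈ c
  charB : ∀ c ∈ st.2, ∀ p ∈ c, pvSeen st.1 p.1 p.2 = true
  good : ∀ c ∈ st.2, ∃ s : Nat × Nat, c.head? = some s ∧ c.Nodup ∧
    (∀ p : Nat × Nat, p ∈ c ↔ (pvFg grid H W bgv p ∧ pvReach grid H W bgv s p)) ∧
    (∀ p : Nat × Nat, p ∈ c → s.1 * W + s.2 ≤ p.1 * W + p.2)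
  pw : st.2.Pairwise (fun c1 c2 => ∀ p ∈ c1, p ∉ c2)

lemma pvScanInv_done_closed {grid : List (List Int)} {H W : Nat} {bgv : Int} {k : Nat}
    {st : List (List Bool) × List (List (Nat × Nat))} (inv : PvScanInv grid H W bgv k st) :
    ∀ p q : Nat × Nat, (∃ c ∈ st.2, p ∈ c) → pvStepR grid H W bgv p q →
      ∃ c ∈ st.2, q ∈ c := by
  rintro p q ⟨c, hc, hp⟩ hstep
  obtain ⟨s, _, _, hmem, _⟩ := inv.good c hc
  have hps := (hmem p).mp hp
  exact ⟨c, hc, (hmem q).mpr ⟨hstep.2.1, Relation.ReflTransGen.tail hps.2 hstep⟩⟩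

lemma pvScan_step {grid : List (List Int)} {H W : Nat} {bgv : Int} {k : Nat}
    {st : List (List Bool) × List (List (Nat × Nat))}
    (h0W : 0 < W) (inv : PvScanInv grid H W bgv k st) (hk : k < H * W) :
    PvScanInv grid H W bgv (k + 1) (pvScanCell grid H W (some bgv) st (k / W) (k % W)) := by
  have hxr : k / W < H := (pv_unid_lt h0W hk).1
  have hxc : k % W < W := (pv_unid_lt h0W hk).2
  have hidk : (k / W) * W + k % W = k := pv_id_of_unid h0W
  rw [pvScanCell]
  by_cases hseen : pvSeen st.1 (k / W) (k % W) = true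
  · rw [if_pos hseen]
    refine ⟨inv.sh, ?_, inv.charF, inv.charB, inv.good, inv.pw⟩
    intro j hj hjn
    rcases Nat.lt_or_ge j k with h | h
    · exact inv.proc j h hjn
    · have : j = k := by omega
      subst this
      exact hseen
  · rw [if_neg hseen]
    have hsf : pvSeen st.1 (k / W) (k % W) = false := by
      cases h : pvSeen st.1 (k / W) (k % W)
      · rfl
      · exact absurd h hseen
    by_cases hbg : pvGet2 grid (k / W) (k % W) == bgv
    · rw [if_pos (by simpa using hbg)]
      have hnfg : ¬ pvFg grid H W bgv (k / W, k % W) := by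
        intro hfg
        exact hfg.2.2 (by simpa using hbg)
      refine ⟨pvShape_mark inv.sh _ _, ?_, ?_, ?_, inv.good, inv.pw⟩
      · intro j hj hjn
        rcases Nat.lt_or_ge j k with h | h
        · exact pvSeen_mark_mono (inv.proc j h hjn)
        · have : j = k := by omega
          subst this
          exact pvSeen_mark_self inv.sh hxr hxc
      · intro p hfg hsn
        by_cases hpx : (p.1, p.2) = (k / W, k % W)
        · exfalso
          apply hnfg
          have hp : p = (k / W, k % W) :=
            Prod.ext (Prod.mk.injEq .. ▸ hpx).1 (Prod.mk.injEq .. ▸ hpx).2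
          rwa [hp] at hfg
        · rw [pvSeen_mark_other hpx] at hsn
          exact inv.charF p hfg hsn
      · intro c hc p hp
        exact pvSeen_mark_mono (inv.charB c hc p hp)
    · rw [if_neg (by simpa using hbg)]
      rw [if_neg (by simp)]
      have hfgx : pvFg grid H W bgv (k / W, k % W) := ⟨hxr, hxc, by simpa using hbg⟩
      have hsndone : ¬ ∃ c ∈ st.2, ((k / W, k % W) : Nat × Nat) ∈ c := by
        rintro ⟨c, hc, hp⟩
        rw [inv.charB c hc _ hp] at hsf
        cases hsf
      have bfsInv : PvBfsInv grid H W bgv (fun p => ∃ c ∈ st.2, p ∈ c) (k / W, k % W)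
          (H * W + 1) [(k / W, k % W)] (pvMark st.1 (k / W) (k % W)) [] := by
        refine ⟨pvShape_mark inv.sh _ _, ?_, ?_, ?_, ?_, ?_, ?_, ?_, ?_, ?_, ?_, ?_, ?_,
          pvScanInv_done_closed inv, hsndone⟩
        · have := List.countP_le_length
            (l := List.range (H * W)) (p := fun i => !pvSeen (pvMark st.1 (k / W) (k % W)) (i / W) (i % W))
          simp only [List.length_range] at this
          have h2 : pvUnseen H W (pvMark st.1 (k / W) (k % W)) ≤ H * W := this
          simp only [List.length_cons, List.length_nil]
          omega
        · intro p hp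
          rw [List.mem_singleton.mp hp]
          exact hfgx
        · intro p hp
          rw [List.mem_singleton.mp hp]
          exact pvSeen_mark_self inv.sh hxr hxc
        · intro p hp; cases hp
        · intro p hp; cases hp
        · exact List.nodup_nil
        · simp
        · intro p hp; cases hp
        · intro p hp; cases hp
        · intro p hfg hsn
          by_cases hpx : (p.1, p.2) = (k / W, k % W)
          · have hp : p = (k / W, k % W) :=
              Prod.ext (Prod.mk.injEq .. ▸ hpx).1 (Prod.mk.injEq .. ▸ hpx).2
            exact Or.inr (Or.inr (by rw [hp]; simp))
          · rw [pvSeen_mark_other hpx] at hsn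
            exact Or.inl (inv.charF p hfg hsn)
        · intro p hp
          rcases hp with h | h
          · cases h
          · rw [List.mem_singleton.mp h]
            exact Relation.ReflTransGen.refl
        · exact Or.inr (by simp)
      have out := pvBfs_spec (H * W + 1) [(k / W, k % W)] (pvMark st.1 (k / W) (k % W)) [] bfsInv
      set res := pvBfs grid H W (some bgv) (H * W + 1) [(k / W, k % W)]
        (pvMark st.1 (k / W) (k % W)) [] with hres
      have hxin : ((k / W, k % W) : Nat × Nat) ∈ res.1 :=
        out.complete _ hfgx Relation.ReflTransGen.refl
      have hne : res.1 ≠ [] := by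
        intro h
        rw [h] at hxin
        cases hxin
      rw [if_pos hne]
      have hhead : res.1.head? = some (k / W, k % W) := by
        obtain ⟨t, ht⟩ := out.first (k / W, k % W) [] rfl
        rw [← ht]
        rfl
      have hnotdone : ∀ p ∈ res.1, ¬ ∃ c ∈ st.2, p ∈ c := by
        intro p hp
        exact pvNotDone_reach (pvScanInv_done_closed inv) hsndone (out.mem p hp).2
      refine ⟨out.sh, ?_, ?_, ?_, ?_, ?_⟩
      · intro j hj hjn
        rcases Nat.lt_or_ge j k with h | h
        · exact out.mono (j / W, j % W) (pvSeen_mark_mono (inv.proc j h hjn))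
        · have : j = k := by omega
          subst this
          exact out.mono (j / W, j % W) (pvSeen_mark_self inv.sh hxr hxc)
      · intro p hfg hsn
        rcases out.seenchar p hfg hsn with ⟨c, hc, hp⟩ | h
        · exact ⟨c, List.mem_append_left _ hc, hp⟩
        · exact ⟨res.1, List.mem_append_right _ (by simp), h⟩
      · intro c hc p hp
        rcases List.mem_append.mp hc with h | h
        · exact out.mono _ (pvSeen_mark_mono (inv.charB c h p hp))
        · rw [List.mem_singleton.mp h] at hp
          exact out.compseen p hp
      · intro c hc
        rcases List.mem_append.mp hc with h | h
        · exact inv.good c h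
        · rw [List.mem_singleton.mp h]
          refine ⟨(k / W, k % W), hhead, out.nd, ?_, ?_⟩
          · intro p
            constructor
            · intro hp
              exact ⟨(out.mem p hp).1, (out.mem p hp).2⟩
            · intro ⟨h1, h2⟩
              exact out.complete p h1 h2
          · intro p hp
            show k / W * W + k % W ≤ p.1 * W + p.2
            by_contra hlt
            have hplt : p.1 * W + p.2 < k := by omega
            have hpfg := (out.mem p hp).1
            obtain ⟨hpn, hpdiv, hpmod⟩ := pv_pair_id (H := H) h0W hpfg.1 hpfg.2.1
            have hps := inv.proc (p.1 * W + p.2) hplt hpn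
            rw [hpdiv, hpmod] at hps
            rcases inv.charF p hpfg hps with ⟨c', hc', hp'⟩
            exact hnotdone p hp ⟨c', hc', hp'⟩
      · rw [List.pairwise_append]
        refine ⟨inv.pw, by simp, ?_⟩
        intro c1 hc1 c2 hc2 p hp1
        rw [List.mem_singleton.mp hc2]
        intro hp2
        exact hnotdone p hp2 ⟨c1, hc1, hp1⟩

lemma pvScan_all {grid : List (List Int)} {H W : Nat} {bgv : Int} (h0W : 0 < W) :
    ∀ (m k : Nat) (st : List (List Bool) × List (List (Nat × Nat))),
      k + m = H * W → PvScanInv grid H W bgv k st →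
      PvScanInv grid H W bgv (H * W)
        ((List.range' k m).foldl
          (fun st i => pvScanCell grid H W (some bgv) st (i / W) (i % W)) st) := by
  intro m
  induction m with
  | zero =>
    intro k st hk inv
    simp only [List.range'_zero, List.foldl_nil]
    have : k = H * W := by omega
    subst this
    exact inv
  | succ m ihm =>
    intro k st hk inv
    rw [List.range'_succ, List.foldl_cons]
    exact ihm (k + 1) _ (by omega) (pvScan_step h0W inv (by omega))

lemma pvConn_spec {grid : List (List Int)} (hrect : pvIsRect grid = true) (bgv : Int) :
    ∃ comps, pvConnComponents grid (some bgv) = comps ∧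
      (∀ c ∈ comps, ∃ s : Nat × Nat, c.head? = some s ∧ c.Nodup ∧
        (∀ p : Nat × Nat, p ∈ c ↔ (pvFg grid grid.length (grid.getD 0 []).length bgv p ∧
          pvReach grid grid.length (grid.getD 0 []).length bgv s p)) ∧
        (∀ p : Nat × Nat, p ∈ c →
          s.1 * (grid.getD 0 []).length + s.2 ≤ p.1 * (grid.getD 0 []).length + p.2)) ∧
      comps.Pairwise (fun c1 c2 => ∀ p ∈ c1, p ∉ c2) ∧
      (∀ p : Nat × Nat, pvFg grid grid.length (grid.getD 0 []).length bgv p →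
        ∃ c ∈ comps, p ∈ c) := by
  have hR := pvRect_of_isRect hrect
  set H := grid.length
  set W := (grid.getD 0 []).length
  have h0W : 0 < W := hR.2.2.1
  have base : PvScanInv grid H W bgv 0
      (List.replicate H (List.replicate W false), []) := by
    refine ⟨pvShape_replicate H W, ?_, ?_, ?_, ?_, ?_⟩
    · intro j hj _; omega
    · intro p _ hsn
      rw [pvSeen_replicate] at hsn
      cases hsn
    · intro c hc; cases hc
    · intro c hc; cases hc
    · exact List.Pairwise.nil
  have inv := pvScan_all (grid := grid) (bgv := bgv) h0W (H * W) 0 _ (by omega) base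
  rw [← List.range_eq_range'] at inv
  rw [pvConnComponents, if_neg (by simp [hrect])]
  dsimp only
  rw [pvRowFold _ H W h0W]
  refine ⟨_, rfl, inv.good, inv.pw, ?_⟩
  intro p hfg
  obtain ⟨hpn, hpdiv, hpmod⟩ := pv_pair_id (H := H) h0W hfg.1 hfg.2.1
  have hps := inv.proc (p.1 * W + p.2) hpn hpn
  rw [hpdiv, hpmod] at hps
  exact inv.charF p hfg hps

-- ---------- A-side write phase ----------
def pvBodyA (grid : List (List Int)) (allowed : PySem.Set Int) (ranked : List (Int × Int))
    (rec : List (List Int)) (comp : List (Nat × Nat)) : List (List Int) :=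
  match comp with
  | [] => rec
  | (r0, c0) :: _ =>
    if allowed.contains (pvGet2 grid r0 c0) then rec
    else
      comp.foldl (fun rec p =>
        rec.set p.1 ((rec.getD p.1 []).set p.2 (pvBestColor ranked (comp.length : Int)))) rec

lemma pvFoldSet_shape {H W : Nat} {rec : List (List Int)} (hsh : pvShapeI H W rec)
    (comp : List (Nat × Nat)) (v : Int) :
    pvShapeI H W (comp.foldl (fun rec (p : Nat × Nat) =>
      rec.set p.1 ((rec.getD p.1 []).set p.2 v)) rec) := by
  induction comp generalizing rec with
  | nil => exact hsh
  | cons p t iht => exact iht (pvShapeI_set2 hsh p.1 p.2 v)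

lemma pvFoldSet_get2 {H W : Nat} {rec : List (List Int)} (hsh : pvShapeI H W rec)
    {comp : List (Nat × Nat)} (hbnd : ∀ p ∈ comp, p.1 < H ∧ p.2 < W)
    {q : Nat × Nat} (hq1 : q.1 < H) (hq2 : q.2 < W) (v : Int) :
    pvGet2 (comp.foldl (fun rec (p : Nat × Nat) =>
      rec.set p.1 ((rec.getD p.1 []).set p.2 v)) rec) q.1 q.2 =
      if q ∈ comp then v else pvGet2 rec q.1 q.2 := by
  induction comp generalizing rec with
  | nil => simp
  | cons p t iht =>
    rw [List.foldl_cons]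
    rw [iht (pvShapeI_set2 hsh p.1 p.2 v) (fun p' hp' => hbnd p' (List.mem_cons_of_mem _ hp'))]
    by_cases hqt : q ∈ t
    · rw [if_pos hqt, if_pos (List.mem_cons_of_mem _ hqt)]
    · rw [if_neg hqt]
      by_cases hqp : q = p
      · subst hqp
        rw [if_pos (by simp)]
        exact pvGet2_set2_self hsh hq1 hq2 v
      · rw [if_neg (by simp [hqp, hqt])]
        refine pvGet2_set2_other ?_ v
        intro hcon
        exact hqp (Prod.ext (Prod.mk.injEq .. ▸ hcon).1 (Prod.mk.injEq .. ▸ hcon).2)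

lemma pvBodyA_shape {H W : Nat} {grid rec : List (List Int)} {allowed : PySem.Set Int}
    {ranked : List (Int × Int)} (hsh : pvShapeI H W rec) (comp : List (Nat × Nat)) :
    pvShapeI H W (pvBodyA grid allowed ranked rec comp) := by
  match comp with
  | [] => exact hsh
  | (r0, c0) :: t =>
    rw [pvBodyA]
    split_ifs with h
    · exact hsh
    · exact pvFoldSet_shape hsh _ _

lemma pvBodyA_get2_notmem {H W : Nat} {grid rec : List (List Int)} {allowed : PySem.Set Int}
    {ranked : List (Int × Int)} (hsh : pvShapeI H W rec) {comp : List (Nat × Nat)}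
    (hbnd : ∀ p ∈ comp, p.1 < H ∧ p.2 < W)
    {q : Nat × Nat} (hq1 : q.1 < H) (hq2 : q.2 < W) (hq : q ∉ comp) :
    pvGet2 (pvBodyA grid allowed ranked rec comp) q.1 q.2 = pvGet2 rec q.1 q.2 := by
  match comp with
  | [] => rfl
  | (r0, c0) :: t =>
    rw [pvBodyA]
    split_ifs with h
    · rfl
    · rw [pvFoldSet_get2 hsh hbnd hq1 hq2]
      rw [if_neg hq]

lemma pvWrites_shape {H W : Nat} {grid : List (List Int)} {allowed : PySem.Set Int}
    {ranked : List (Int × Int)} {comps : List (List (Nat × Nat))} {rec : List (List Int)}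
    (hsh : pvShapeI H W rec) :
    pvShapeI H W (comps.foldl (pvBodyA grid allowed ranked) rec) := by
  induction comps generalizing rec with
  | nil => exact hsh
  | cons c t iht => exact iht (pvBodyA_shape hsh c)

lemma pvWrites_get2_none {H W : Nat} {grid : List (List Int)} {allowed : PySem.Set Int}
    {ranked : List (Int × Int)} {comps : List (List (Nat × Nat))} {rec : List (List Int)}
    (hsh : pvShapeI H W rec) (hbnd : ∀ c ∈ comps, ∀ p ∈ c, p.1 < H ∧ p.2 < W)
    {q : Nat × Nat} (hq1 : q.1 < H) (hq2 : q.2 < W) (hq : ∀ c ∈ comps, q ∉ c) :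
    pvGet2 (comps.foldl (pvBodyA grid allowed ranked) rec) q.1 q.2 = pvGet2 rec q.1 q.2 := by
  induction comps generalizing rec with
  | nil => rfl
  | cons c t iht =>
    rw [List.foldl_cons]
    rw [iht (pvBodyA_shape hsh c) (fun c' hc' => hbnd c' (List.mem_cons_of_mem _ hc'))
      (fun c' hc' => hq c' (List.mem_cons_of_mem _ hc'))]
    exact pvBodyA_get2_notmem hsh (hbnd c (by simp)) hq1 hq2 (hq c (by simp))

lemma pvWrites_get2_mem {H W : Nat} {grid : List (List Int)} {allowed : PySem.Set Int}
    {ranked : List (Int × Int)} {comps : List (List (Nat × Nat))} {rec : List (List Int)}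
    (hsh : pvShapeI H W rec) (hbnd : ∀ c ∈ comps, ∀ p ∈ c, p.1 < H ∧ p.2 < W)
    (hpw : comps.Pairwise (fun c1 c2 => ∀ p ∈ c1, p ∉ c2))
    {q : Nat × Nat} (hq1 : q.1 < H) (hq2 : q.2 < W)
    {c : List (Nat × Nat)} (hc : c ∈ comps) (hqc : q ∈ c)
    (huniq : ∀ c' ∈ comps, q ∈ c' → c' = c)
    {s : Nat × Nat} (hhead : c.head? = some s) :
    pvGet2 (comps.foldl (pvBodyA grid allowed ranked) rec) q.1 q.2 =
      if allowed.contains (pvGet2 grid s.1 s.2) then pvGet2 rec q.1 q.2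
      else pvBestColor ranked (c.length : Int) := by
  induction comps generalizing rec with
  | nil => cases hc
  | cons c0 t iht =>
    rw [List.foldl_cons]
    rcases List.mem_cons.mp hc with rfl | hct
    · -- q is in the head component
      have hqnott : ∀ c' ∈ t, q ∉ c' := by
        intro c' hc' hq'
        exact (List.pairwise_cons.mp hpw).1 c' hc' q hqc hq'
      rw [pvWrites_get2_none (pvBodyA_shape hsh c) (fun c' hc' => hbnd c' (by simp [hc']))
        hq1 hq2 hqnott]
      obtain ⟨⟨r0, c0'⟩, t0, rfl⟩ : ∃ s' t0, c = s' :: t0 := by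
        cases c with
        | nil => cases hqc
        | cons a b => exact ⟨a, b, rfl⟩
      have hs : s = (r0, c0') := by
        simp only [List.head?_cons, Option.some.injEq] at hhead
        exact hhead.symm
      subst hs
      rw [pvBodyA]
      split_ifs with hallow
      · rfl
      · rw [pvFoldSet_get2 hsh (hbnd _ (by simp)) hq1 hq2]
        rw [if_pos hqc]
    · -- q is in a later component
      have hqnotc0 : q ∉ c0 := by
        intro hq0
        have heq : c0 = c := huniq c0 (by simp) hq0
        rcases List.pairwise_cons.mp hpw with ⟨hdisj, _⟩
        exact hdisj c hct q (heq ▸ hq0) hqc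
      rw [iht (pvBodyA_shape hsh c0) (fun c' hc' => hbnd c' (by simp [hc']))
        (List.pairwise_cons.mp hpw).2 hct (fun c' hc' hq' => huniq c' (by simp [hc']) hq')]
      rw [pvBodyA_get2_notmem hsh (hbnd c0 (by simp)) hq1 hq2 hqnotc0]

-- ---------- B-side dictionaries ----------
lemma pvSizeFold_eq (n : Nat) (L : List Int) (F : PySem.Dict Int Int → Nat → PySem.Dict Int Int)
    (hF : ∀ d i, F d i =
      if 0 ≤ L.getD i 0 then d.insert (L.getD i 0) (d.getD (L.getD i 0) 0 + 1) else d) :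
    (List.range n).foldl F PySem.Dict.empty =
      ((((List.range n).filter (fun i => decide (0 ≤ L.getD i 0))).map
        (fun i => L.getD i 0))).foldl
        (fun d (x : Int) => d.insert x (d.getD x 0 + 1)) PySem.Dict.empty := by
  rw [List.foldl_map, List.foldl_filter]
  refine (PySem.List.foldl_congr_mem _ _ _ _ ?_).symm
  intro acc i _
  rw [hF]
  by_cases h : 0 ≤ L.getD i 0
  · rw [if_pos (by simpa using h), if_pos h]
  · rw [if_neg (by simpa using h), if_neg h]

lemma pvSize_getD (n : Nat) (L : List Int) (v : Int)
    (F : PySem.Dict Int Int → Nat → PySem.Dict Int Int)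
    (hF : ∀ d i, F d i =
      if 0 ≤ L.getD i 0 then d.insert (L.getD i 0) (d.getD (L.getD i 0) 0 + 1) else d) :
    ((List.range n).foldl F PySem.Dict.empty).getD v 0 =
      ((((List.range n).filter (fun i => decide (0 ≤ L.getD i 0))).map
        (fun i => L.getD i 0)).count v : Int) := by
  rw [pvSizeFold_eq n L F hF, PySem.Dict.getD_foldl_insert_add_one]
  simp [PySem.Dict.getD_empty]

lemma pvSize_keys_nodup (n : Nat) (L : List Int)
    (F : PySem.Dict Int Int → Nat → PySem.Dict Int Int)
    (hF : ∀ d i, F d i =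
      if 0 ≤ L.getD i 0 then d.insert (L.getD i 0) (d.getD (L.getD i 0) 0 + 1) else d) :
    ((List.range n).foldl F PySem.Dict.empty).keys.Nodup := by
  rw [pvSizeFold_eq n L F hF]
  exact PySem.Dict.nodup_keys_foldl_insert _ _ _ PySem.Dict.nodup_keys_empty

lemma pvSize_mem_keys (n : Nat) (L : List Int) {v : Int}
    (F : PySem.Dict Int Int → Nat → PySem.Dict Int Int)
    (hF : ∀ d i, F d i =
      if 0 ≤ L.getD i 0 then d.insert (L.getD i 0) (d.getD (L.getD i 0) 0 + 1) else d)
    (hpos : 0 < (((List.range n).filter (fun i => decide (0 ≤ L.getD i 0))).map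
        (fun i => L.getD i 0)).count v) :
    v ∈ ((List.range n).foldl F PySem.Dict.empty).keys := by
  by_contra hnot
  have hcont : ((List.range n).foldl F PySem.Dict.empty).contains v = false := by
    cases h : ((List.range n).foldl F PySem.Dict.empty).contains v
    · rfl
    · exact absurd ((PySem.Dict.contains_iff_mem_keys _ _).mp h) hnot
  have h0 := PySem.Dict.getD_of_not_contains _ (0 : Int) hcont
  rw [pvSize_getD n L v F hF] at h0
  omega

lemma pvBest_getD (ranked : List (Int × Int)) (d : PySem.Dict Int Int)
    (G : PySem.Dict Int Int → Int × Int → PySem.Dict Int Int)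
    (hG : ∀ b p, G b p = b.insert p.1 (pvBestColor ranked p.2))
    (hnd : d.keys.Nodup) {m : Int} (hm : m ∈ d.keys) :
    (d.items.foldl G PySem.Dict.empty).getD m 0 = pvBestColor ranked (d.getD m 0) := by
  have hGe : d.items.foldl G PySem.Dict.empty =
      d.items.foldl (fun b (p : Int × Int) => b.insert p.1 (pvBestColor ranked p.2))
        PySem.Dict.empty := by
    refine PySem.List.foldl_congr_mem _ _ _ _ ?_
    intro acc p _
    rw [hG]
  rw [hGe]
  have hitems := PySem.Dict.items_foldl_insert_fresh (d := (PySem.Dict.empty : PySem.Dict Int Int))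
    (l := d.items) (k := fun p => p.1) (v := fun p => pvBestColor ranked p.2)
    (by intro a _; exact PySem.Dict.contains_empty _) (by
      have hmk : d.items.map (fun p : Int × Int => p.1) = d.keys := rfl
      rw [hmk]; exact hnd)
  have hmemitems : (m, d.getD m 0) ∈ d.items := by
    have := PySem.Dict.items_eq_map_keys d hnd 0
    rw [this]
    exact List.mem_map.mpr ⟨m, hm, rfl⟩
  have hmemnew : (m, pvBestColor ranked (d.getD m 0)) ∈
      (d.items.foldl (fun b (p : Int × Int) => b.insert p.1 (pvBestColor ranked p.2))
        PySem.Dict.empty).items := by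
    rw [hitems]
    refine List.mem_append_right _ ?_
    exact List.mem_map.mpr ⟨(m, d.getD m 0), hmemitems, rfl⟩
  refine PySem.Dict.getD_of_mem_items _ hmemnew ?_ 0
  have hkeysdef : (d.items.foldl (fun b (p : Int × Int) => b.insert p.1 (pvBestColor ranked p.2))
      PySem.Dict.empty).keys =
      ((d.items.foldl (fun b (p : Int × Int) => b.insert p.1 (pvBestColor ranked p.2))
        PySem.Dict.empty).items).map (fun p => p.1) := rfl
  rw [hkeysdef, hitems]
  simp only [List.map_append, List.map_map]
  have hcomp : ((fun p : Int × Int => p.1) ∘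
      fun p : Int × Int => (p.1, pvBestColor ranked p.2)) = fun p : Int × Int => p.1 := rfl
  rw [hcomp]
  have hk : d.items.map (fun p : Int × Int => p.1) = d.keys := rfl
  rw [hk]
  have hempty : ((PySem.Dict.empty : PySem.Dict Int Int).items).map (fun p => p.1) = [] := rfl
  rw [hempty]
  simpa using hnd

-- ---------- final auxiliary lemmas ----------
lemma pvPw_uniq {l : List (List (Nat × Nat))}
    (hpw : l.Pairwise (fun c1 c2 => ∀ p ∈ c1, p ∉ c2))
    {c1 c2 : List (Nat × Nat)} (h1 : c1 ∈ l) (h2 : c2 ∈ l) {p : Nat × Nat}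
    (hp1 : p ∈ c1) (hp2 : p ∈ c2) : c1 = c2 := by
  induction l with
  | nil => cases h1
  | cons h t iht =>
    rcases List.mem_cons.mp h1 with rfl | h1'
    · rcases List.mem_cons.mp h2 with rfl | h2'
      · rfl
      · exact absurd hp2 ((List.pairwise_cons.mp hpw).1 c2 h2' p hp1)
    · rcases List.mem_cons.mp h2 with rfl | h2'
      · exact absurd hp1 ((List.pairwise_cons.mp hpw).1 c1 h1' p hp2)
      · exact iht (List.pairwise_cons.mp hpw).2 h1' h2'

lemma pvLabel0_good {grid : List (List Int)} {H W : Nat} {bgv : Int} (h0W : 0 < W) :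
    pvGoodL grid H W bgv ((List.range (H * W)).map
      (fun i => if pvGet2 grid (i / W) (i % W) == bgv then -1 else (i : Int))) := by
  refine ⟨by simp, ?_⟩
  intro i hi
  rw [pvMapRange_getD _ _ _ _ hi]
  constructor
  · intro hfg
    rw [if_pos ?_]
    by_contra hne
    exact hfg ⟨(pv_unid_lt h0W hi).1, (pv_unid_lt h0W hi).2, by simpa using hne⟩
  · intro hfg
    rw [if_neg (by simpa using hfg.2.2)]
    exact ⟨⟨i, hi, hfg, Relation.ReflTransGen.refl, rfl⟩, le_refl _⟩

lemma pvMu_label0_le (grid : List (List Int)) (H W : Nat) (bgv : Int) :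
    pvMu H W ((List.range (H * W)).map
      (fun i => if pvGet2 grid (i / W) (i % W) == bgv then -1 else (i : Int))) ≤
      H * W * (H * W) := by
  rw [pvMu]
  have hle : ∀ x ∈ (List.range (H * W)).map (fun i =>
      ((((List.range (H * W)).map
        (fun i => if pvGet2 grid (i / W) (i % W) == bgv then -1 else (i : Int))).getD i 0 + 1)).toNat),
      x ≤ H * W := by
    intro x hx
    obtain ⟨i, hi, rfl⟩ := List.mem_map.mp hx
    have hi' : i < H * W := List.mem_range.mp hi
    rw [pvMapRange_getD _ _ _ _ hi']
    split_ifs <;> omega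
  have := List.sum_le_card_nsmul _ _ hle
  simpa using this

lemma pvCount_eq {grid : List (List Int)} {H W : Nat} {bgv : Int} (h0W : 0 < W)
    (Lf : List Int) (s : Nat × Nat) (c : List (Nat × Nat)) (hnd : c.Nodup)
    (hmem : ∀ p : Nat × Nat, p ∈ c ↔ (pvFg grid H W bgv p ∧ pvReach grid H W bgv s p))
    (hLc : ∀ i, i < H * W → (Lf.getD i 0 = ((s.1 * W + s.2 : Nat) : Int) ↔
      (pvFg grid H W bgv (i / W, i % W) ∧ pvReach grid H W bgv s (i / W, i % W)))) :
    ((((List.range (H * W)).filter (fun i => decide (0 ≤ Lf.getD i 0))).map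
      (fun i => Lf.getD i 0)).count ((s.1 * W + s.2 : Nat) : Int)) = c.length := by
  set m : Int := ((s.1 * W + s.2 : Nat) : Int) with hm
  have hmnn : 0 ≤ m := Int.natCast_nonneg _
  -- drop the filter: every cell labelled m passes the 0 ≤ filter
  rw [List.count_eq_countP, List.countP_map, List.countP_filter]
  have hpred : ∀ i ∈ List.range (H * W),
      (((fun x => x == m) ∘ fun i => Lf.getD i 0) i && decide (0 ≤ Lf.getD i 0)) =
        decide (Lf.getD i 0 = m) := by
    intro i _
    show (Lf.getD i 0 == m && decide (0 ≤ Lf.getD i 0)) = decide (Lf.getD i 0 = m)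
    set x := Lf.getD i 0 with hx
    by_cases h : x = m
    · rw [h]
      simp [hmnn]
    · simp [h]
  rw [List.countP_congr (fun i hi => by rw [hpred i hi])]
  -- the labelled cells are exactly the ids of the component cells
  have hperm : (c.map (fun p : Nat × Nat => p.1 * W + p.2)).Perm
      ((List.range (H * W)).filter (fun i => decide (Lf.getD i 0 = m))) := by
    rw [List.perm_ext_iff_of_nodup]
    · intro a
      constructor
      · intro ha
        obtain ⟨p, hp, rfl⟩ := List.mem_map.mp ha
        have hfg := ((hmem p).mp hp).1
        obtain ⟨han, hdiv, hmod⟩ := pv_pair_id (H := H) h0W hfg.1 hfg.2.1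
        rw [List.mem_filter]
        refine ⟨List.mem_range.mpr han, ?_⟩
        rw [decide_eq_true_eq, (hLc _ han), hdiv, hmod]
        exact ⟨hfg, ((hmem p).mp hp).2⟩
      · intro ha
        obtain ⟨har, haL⟩ := List.mem_filter.mp ha
        have han := List.mem_range.mp har
        rw [decide_eq_true_eq, hLc _ han] at haL
        refine List.mem_map.mpr ⟨(a / W, a % W), (hmem _).mpr haL, ?_⟩
        exact pv_id_of_unid h0W
    · refine List.Nodup.map_on ?_ hnd
      intro p hp q hq hpq
      have hfgp := ((hmem p).mp hp).1
      have hfgq := ((hmem q).mp hq).1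
      obtain ⟨_, hdp, hmp⟩ := pv_pair_id (H := H) h0W hfgp.1 hfgp.2.1
      obtain ⟨_, hdq, hmq⟩ := pv_pair_id (H := H) h0W hfgq.1 hfgq.2.1
      have h1 : p.1 = q.1 := by rw [← hdp, ← hdq, hpq]
      have h2 : p.2 = q.2 := by rw [← hmp, ← hmq, hpq]
      exact Prod.ext h1 h2
    · exact List.Nodup.filter _ List.nodup_range
  rw [List.countP_eq_length_filter, ← hperm.length_eq, List.length_map]

lemma pvGetElem_eq_get2 {H W : Nat} {g : List (List Int)} (hsh : pvShapeI H W g) {r c : Nat}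
    (hr : r < H) (hc : c < W) (h1 : r < g.length) (h2 : c < g[r].length) :
    g[r][c] = pvGet2 g r c := by
  have e1 : g.getD r [] = g[r] := by
    rw [List.getD_eq_getElem?_getD, List.getElem?_eq_getElem h1, Option.getD_some]
  rw [pvGet2, e1, List.getD_eq_getElem _ _ h2]

lemma pvMain (grid : List (List Int)) (palette_freq : List (Int × Int)) :
    recolor_components_to_palette_py grid palette_freq =
      recolor_components_to_palette_py_alt grid palette_freq := by
  by_cases hcond : pvIsRect grid = false ∨ (PySem.Dict.ofList palette_freq).size = 0
  · simp only [recolor_components_to_palette_py, recolor_components_to_palette_py_alt]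
    rw [if_pos hcond, if_pos hcond]
  · simp only [recolor_components_to_palette_py, recolor_components_to_palette_py_alt]
    rw [if_neg hcond, if_neg hcond]
    have hrect : pvIsRect grid = true := by
      cases h : pvIsRect grid
      · exact absurd (Or.inl h) hcond
      · rfl
    have hR := pvRect_of_isRect hrect
    set W := (grid.getD 0 []).length with hWdef
    set H := grid.length with hHdef
    set bgv := pvModeColor grid with hbgdef
    have h0W : 0 < W := hR.2.2.1
    have hshg : pvShapeI H W grid := ⟨hR.1, hR.2.2.2⟩
    set n := H * W with hndef
    obtain ⟨comps, hcomps, hgood, hpw, hcover⟩ := pvConn_spec hrect bgv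
    rw [hcomps]
    have hgridcopy : grid.map (fun row => row.map (fun x => x)) = grid := by
      simp [List.map_id']
    rw [hgridcopy]
    set allowed : PySem.Set Int := PySem.Set.ofList (PySem.Dict.ofList palette_freq).keys
      with hallowdef
    set ranked := PySem.List.sorted2 (PySem.Dict.ofList palette_freq).items
      (fun kv => -kv.2) (fun kv => kv.1) false with hrankdef
    have hbody : (fun (rec : List (List Int)) (comp : List (Nat × Nat)) =>
        match comp with
        | [] => rec
        | (r0, c0) :: _ =>
          if allowed.contains (pvGet2 grid r0 c0) then rec
          else comp.foldl (fun rec p =>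
            rec.set p.1 ((rec.getD p.1 []).set p.2 (pvBestColor ranked (comp.length : Int)))) rec)
        = pvBodyA grid allowed ranked := rfl
    rw [hbody]
    set label0 := (List.range n).map
      (fun i => if pvGet2 grid (i / W) (i % W) == bgv then -1 else (i : Int)) with hl0def
    set Lf := pvPropagate H W (n * n) label0 with hLfdef
    obtain ⟨hgoodLf, hfixLf⟩ := pvPropagate_fixpoint (grid := grid) (bgv := bgv) h0W (n * n)
      label0 (pvLabel0_good h0W) (pvMu_label0_le grid H W bgv)
    have hbnd : ∀ c' ∈ comps, ∀ p ∈ c', p.1 < H ∧ p.2 < W := by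
      intro c' hc' p hp'
      obtain ⟨s', _, _, hmem', _⟩ := hgood c' hc'
      have hfg' := ((hmem' p).mp hp').1
      exact ⟨hfg'.1, hfg'.2.1⟩
    -- final extensional comparison
    apply List.ext_getElem
    · rw [(pvWrites_shape (grid := grid) (ranked := ranked) (allowed := allowed)
        (comps := comps) (rec := grid) hshg).1]
      simp
    · intro r h1 h2
      have hr : r < H := by
        have := (pvWrites_shape (grid := grid) (ranked := ranked) (allowed := allowed)
          (comps := comps) (rec := grid) hshg).1
        omega
      have hshA := pvWrites_shape (grid := grid) (ranked := ranked) (allowed := allowed)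
        (comps := comps) (rec := grid) hshg
      apply List.ext_getElem
      · have hlenA : ((comps.foldl (pvBodyA grid allowed ranked) grid)[r]).length = W := by
          have := hshA.2 r hr
          rw [List.getD_eq_getElem?_getD, List.getElem?_eq_getElem h1, Option.getD_some] at this
          exact this
        rw [hlenA]
        simp [List.getElem_map, List.getElem_range]
      · intro c hc1 hc2
        have hc : c < W := by
          have := hshA.2 r hr
          rw [List.getD_eq_getElem?_getD, List.getElem?_eq_getElem h1, Option.getD_some] at this
          omega
        rw [pvGetElem_eq_get2 hshA hr hc h1 hc1]
        -- reduce the B side to its cell expression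
        simp only [List.getElem_map, List.getElem_range]
        -- cell-level reasoning
        obtain ⟨hin, hdiv, hmod⟩ := pv_pair_id (p := (r, c)) (H := H) h0W hr hc
        simp only at hin hdiv hmod
        by_cases hfg : pvFg grid H W bgv (r, c)
        · -- foreground cell
          obtain ⟨c0, hc0mem, hp⟩ := hcover (r, c) hfg
          obtain ⟨s, hhead, hnd0, hmemc0, hminc0⟩ := hgood c0 hc0mem
          have hsmem : s ∈ c0 := by
            cases c0 with
            | nil => cases hhead
            | cons a t =>
              simp only [List.head?_cons, Option.some.injEq] at hhead
              rw [← hhead]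
              simp
          have hfgs := ((hmemc0 s).mp hsmem).1
          have hreach_ps : pvReach grid H W bgv s (r, c) := ((hmemc0 (r, c)).mp hp).2
          obtain ⟨hsn, hsdiv, hsmod⟩ := pv_pair_id (p := s) (H := H) h0W hfgs.1 hfgs.2.1
          set ids := s.1 * W + s.2 with hidsdef
          have hunid_ids : ((ids / W : Nat), (ids % W : Nat)) = s := by
            rw [hsdiv, hsmod]
          have hLi_eq_Ls : Lf.getD (r * W + c) 0 = Lf.getD ids 0 := by
            apply pvFix_reach_eq h0W hgoodLf hfixLf hin hsn
            rw [hdiv, hmod, hsdiv, hsmod]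
            exact pvReach_symm hreach_ps
          have hfg_i : pvFg grid H W bgv ((r * W + c) / W, (r * W + c) % W) := by
            rw [hdiv, hmod]; exact hfg
          have hfg_ids : pvFg grid H W bgv (ids / W, ids % W) := by
            rw [hsdiv, hsmod]; exact hfgs
          obtain ⟨⟨j1, hj1n, hfgj1, hreach1, hLi⟩, _⟩ := (hgoodLf.2 _ hin).2 hfg_i
          obtain ⟨⟨j2, hj2n, hfgj2, hreach2, hLids⟩, hle_ids⟩ := (hgoodLf.2 _ hsn).2 hfg_ids
          have hj12 : j1 = j2 := by
            have := hLi_eq_Ls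
            rw [hLi, hLids] at this
            exact_mod_cast this
          have hj1mem : ((j1 / W : Nat), (j1 % W : Nat)) ∈ c0 := by
            rw [hmemc0]
            refine ⟨hfgj1, ?_⟩
            refine Relation.ReflTransGen.trans hreach_ps ?_
            rw [hdiv, hmod] at hreach1
            exact hreach1
          have hids_le_j1 : ids ≤ j1 := by
            have := hminc0 _ hj1mem
            rw [pv_id_of_unid h0W] at this
            exact this
          have hLm : Lf.getD (r * W + c) 0 = (ids : Int) := by
            rw [hLi]
            have h1' : (j1 : Int) ≤ (ids : Int) := by
              rw [hj12]
              rw [hLids] at hle_ids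
              exact_mod_cast hle_ids
            have h2' : (ids : Int) ≤ (j1 : Int) := by exact_mod_cast hids_le_j1
            omega
          have hLids_eq : Lf.getD ids 0 = (ids : Int) := by rw [← hLi_eq_Ls, hLm]
          have hLc : ∀ i', i' < H * W → (Lf.getD i' 0 = ((ids : Nat) : Int) ↔
              (pvFg grid H W bgv (i' / W, i' % W) ∧
                pvReach grid H W bgv s (i' / W, i' % W))) := by
            intro i' hi'
            constructor
            · intro h
              have hnn : 0 ≤ Lf.getD i' 0 := by rw [h]; exact Int.natCast_nonneg _
              have hfg' := (pvGoodL_nonneg_iff hgoodLf hi').mp hnn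
              refine ⟨hfg', ?_⟩
              obtain ⟨⟨j', hj'n, hfgj', hreach', hL'⟩, _⟩ := (hgoodLf.2 i' hi').2 hfg'
              have hj'ids : j' = ids := by
                rw [hL'] at h
                exact_mod_cast h
              rw [hj'ids, hunid_ids] at hreach'
              exact pvReach_symm hreach'
            · intro ⟨hfg', hreach'⟩
              have := pvFix_reach_eq h0W hgoodLf hfixLf hi' hsn
                (by rw [hsdiv, hsmod]; exact pvReach_symm hreach')
              rw [this, hLids_eq]
          have huniq : ∀ c' ∈ comps, ((r, c) : Nat × Nat) ∈ c' → c' = c0 :=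
            fun c' hc' hp' => pvPw_uniq hpw hc' hc0mem hp' hp
          rw [pvWrites_get2_mem hshg hbnd hpw hr hc hc0mem hp huniq hhead]
          rw [hLm]
          have htoNat : ((ids : Int)).toNat = ids := Int.toNat_natCast _
          rw [htoNat, hsdiv, hsmod]
          by_cases hallow : allowed.contains (pvGet2 grid s.1 s.2) = true
          · rw [if_pos hallow]
            rw [if_neg (by
              intro hconj
              rw [hallow] at hconj
              cases hconj.2)]
          · have hallow' : allowed.contains (pvGet2 grid s.1 s.2) = false := by
              cases h : allowed.contains (pvGet2 grid s.1 s.2)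
              · rfl
              · exact absurd h hallow
            rw [if_neg hallow]
            rw [if_pos ⟨Int.natCast_nonneg _, hallow'⟩]
            -- best dictionary lookup
            have hcount := pvCount_eq h0W Lf s c0 hnd0 hmemc0 hLc
            have hlen0 : 0 < c0.length := List.length_pos_of_mem hp
            rw [pvBest_getD ranked _ _ (fun _ _ => rfl)
              (pvSize_keys_nodup n Lf _ (fun _ _ => rfl))
              (pvSize_mem_keys n Lf _ (fun _ _ => rfl) (by rw [hndef, hcount]; omega))]
            rw [pvSize_getD n Lf _ _ (fun _ _ => rfl)]
            rw [hndef, hcount]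
        · -- background cell
          have hnomem : ∀ c' ∈ comps, ((r, c) : Nat × Nat) ∉ c' := by
            intro c' hc' hp'
            obtain ⟨s', _, _, hmem', _⟩ := hgood c' hc'
            exact hfg ((hmem' _).mp hp').1
          rw [pvWrites_get2_none hshg hbnd hr hc hnomem]
          have hLneg : Lf.getD (r * W + c) 0 = -1 := by
            have := (hgoodLf.2 _ hin).1
            rw [hdiv, hmod] at this
            exact this hfg
          rw [if_neg (by
            intro hconj
            rw [hLneg] at hconj
            omega)]

-- ===== VERDICT (by name: the statement is the Claim_ definition above) =====
theorem recolor_components_to_palette_py_spec : Claim_equal_recolor_components_to_palette_py := by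
  intro grid palette_freq _hdom
  unfold Spec_recolor_components_to_palette_py
  exact pvMain grid palette_freq
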